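-- pv_equiv track=rewrite | github.com/nicekim2000/CodingTest | Programmers/[PCCP 기출문제] 2번.py | solution
-- ===== SOURCE A (Python) =====
-- def solution(land):
--     def bfs(visited, r, c,num,land):
--         q = []
--         visited_list = []
--         q.append((r, c))
--         visited_list.append((r, c))
--         visited[r][c] = 1
--         land[r][c]=num
--         dr, dc = [0, 0, 1, -1], [1, -1, 0, 0]
--         while q:
--             nr, nc = q.pop(0)
--             for i in range(4):
--                 new_r, new_c = nr + dr[i], nc + dc[i]
--                 if new_r < 0 or new_r >= len(land) or new_c < 0 or new_c >= len(land[0]):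
--                     continue
--                 if visited[new_r][new_c] >= 1: continue
--                 if land[new_r][new_c] == 0: continue
--                 land[new_r][new_c]=num
--                 q.append((new_r, new_c))
--                 visited_list.append((new_r, new_c))
--                 visited[new_r][new_c] = 1
--         for r, c in visited_list:
--             visited[r][c] = len(visited_list)
--         return visited,land
--
--     visited = [[0 for _ in range(len(land[0]))] for _ in range(len(land))]
--     num=2
--     for i in range(len(land)):
--         for j in range(len(land[0])):
--             if land[i][j] == 1 and visited[i][j] == 0:
--                 visited,land = bfs(visited, i, j,num,land)
--                 num+=1
--
--     answer = []
--     for i in range(len(land[0])):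
--         temp = 0
--         dup=[]
--         for j in range(len(land)):
--             if land[j][i]>=2 and land[j][i] not in dup:
--                 dup.append(land[j][i])
--                 temp += visited[j][i]
--         answer.append(temp)
--     return max(answer)
-- ===== SOURCE B (Python) =====
-- def solution(land):
--     # Union-find over cells: islands are merged bottom-up/rightward, each island's
--     # representative is its smallest cell in reading order.  A mutates `land` in place
--     # (island labels 2,3,... overwrite island cells); B performs the same mutation.
--     rows, cols = len(land), len(land[0])
--     parent = list(range(rows * cols))
--
--     def find(x):
--         while parent[x] != x:
--             x = parent[x]
--         return x
--
--     def union(a, b):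
--         ra, rb = find(a), find(b)
--         if ra < rb:
--             parent[rb] = ra
--         elif rb < ra:
--             parent[ra] = rb
--
--     for i in range(rows):
--         for j in range(cols):
--             if land[i][j] != 0:
--                 if j + 1 < cols and land[i][j + 1] != 0:
--                     union(i * cols + j, i * cols + j + 1)
--                 if i + 1 < rows and land[i + 1][j] != 0:
--                     union(i * cols + j, (i + 1) * cols + j)
--
--     label = {}  # representative -> island label, 2, 3, ... in reading order of first 1-cell
--     for i in range(rows):
--         for j in range(cols):
--             if land[i][j] == 1:
--                 r = find(i * cols + j)
--                 if r not in label: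
--                     label[r] = 2 + len(label)
--
--     size = {}   # island label -> area (number of cells)
--     for i in range(rows):
--         for j in range(cols):
--             if land[i][j] != 0:
--                 r = find(i * cols + j)
--                 if r in label:
--                     size[label[r]] = size.get(label[r], 0) + 1
--
--     area = [[0] * cols for _ in range(rows)]   # per-cell island area
--     for i in range(rows):
--         for j in range(cols):
--             if land[i][j] != 0:
--                 r = find(i * cols + j)
--                 if r in label:
--                     area[i][j] = size[label[r]]
--                     land[i][j] = label[r]
--
--     best = 0
--     for j in range(cols):
--         seen = set()
--         t = 0
--         for i in range(rows):
--             v = land[i][j]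
--             if v >= 2 and v not in seen:
--                 seen.add(v)
--                 t += area[i][j]
--         best = max(best, t)
--     return best
-- ===== Notes on version B (the rewrite author's own statement) =====
-- stated objective: alternative
-- what changed: B replaces A's per-seed BFS flood fill (FIFO queue with pop(0), visited grid, size write-back pass per component) by a union-find over all cells: adjacent nonzero cells are unioned once (representative = smallest cell in reading order), then labels, sizes, per-cell areas and the in-place label write into land are derived from the final parent array, and the per-column pass keeps a set and a running maximum instead of a dup list and an answer list fed to max().
-- outside the precondition, e.g. on solution([]): A raises IndexError, B raises IndexError; on solution([[1, 0], []]): A raises IndexError, B raises IndexError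
import Mathlib
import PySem

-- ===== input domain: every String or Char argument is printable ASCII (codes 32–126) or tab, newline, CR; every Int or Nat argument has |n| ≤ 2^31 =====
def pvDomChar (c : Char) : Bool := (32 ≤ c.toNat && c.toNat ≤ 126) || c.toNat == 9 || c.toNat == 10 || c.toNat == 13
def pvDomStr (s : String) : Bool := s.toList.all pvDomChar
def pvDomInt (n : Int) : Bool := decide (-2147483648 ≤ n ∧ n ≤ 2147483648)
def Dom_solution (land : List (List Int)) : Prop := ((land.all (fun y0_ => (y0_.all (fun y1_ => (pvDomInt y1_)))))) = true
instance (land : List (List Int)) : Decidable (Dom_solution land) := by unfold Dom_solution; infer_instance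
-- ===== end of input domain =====

-- B replaces A's per-seed BFS flood fill by a union-find over all cells (labels, sizes,
-- per-cell areas and the in-place label write into `land` are derived from the final
-- parent array); objective: alternative.  Both A and B mutate the argument `land` the
-- same way (island labels 2,3,… overwrite island cells); the theorems below are about
-- the RETURN value.

-- ===== PORT A =====
-- land[r][c] (total form; every use in the ports is guarded in range on Pre_ inputs)
def pvGGet (g : List (List Int)) (r c : Int) : Int :=
  PySem.List.pyGetD (PySem.List.pyGetD g r []) c 0
-- g[r][c] = v
def pvGSet (g : List (List Int)) (r c : Int) (v : Int) : List (List Int) :=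
  PySem.List.pySetD g r (PySem.List.pySetD (PySem.List.pyGetD g r []) c v)

-- one neighbour test of A's `for i in range(4)` body; state (visited, land, q, visited_list)
def pvBfsStepA (rows cols num nr nc : Int)
    (st : List (List Int) × List (List Int) × List (Int × Int) × List (Int × Int))
    (d : Int × Int) :
    List (List Int) × List (List Int) × List (Int × Int) × List (Int × Int) :=
  let newR := nr + d.1
  let newC := nc + d.2
  if newR < 0 ∨ rows ≤ newR ∨ newC < 0 ∨ cols ≤ newC then st
  else if 1 ≤ pvGGet st.1 newR newC then st
  else if pvGGet st.2.1 newR newC = 0 then st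
  else (pvGSet st.1 newR newC 1, pvGSet st.2.1 newR newC num,
        st.2.2.1 ++ [(newR, newC)], st.2.2.2 ++ [(newR, newC)])

-- A's `while q:` loop (fuel-bounded recursion; fuel only makes the loop structural)
def pvBfsLoopA (rows cols num : Int) :
    Nat → List (List Int) × List (List Int) × List (Int × Int) × List (Int × Int) →
    List (List Int) × List (List Int) × List (Int × Int) × List (Int × Int)
  | 0, st => st
  | fuel + 1, (V, L, q, vl) =>
    match q with
    | [] => (V, L, [], vl)
    | (nr, nc) :: q' =>
      pvBfsLoopA rows cols num fuel
        ((List.zip [0, 0, 1, -1] [1, -1, 0, 0]).foldl (pvBfsStepA rows cols num nr nc)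
          (V, L, q', vl))

-- A's bfs helper: returns (visited, land) after the flood and the size-writeback pass
def pvBfsA (fuel : Nat) (rows cols num : Int) (V L : List (List Int)) (r c : Int) :
    List (List Int) × List (List Int) :=
  let st := pvBfsLoopA rows cols num fuel
    (pvGSet V r c 1, pvGSet L r c num, [(r, c)], [(r, c)])
  let vl := st.2.2.2
  (vl.foldl (fun g p => pvGSet g p.1 p.2 (vl.length : Int)) st.1, st.2.1)

def solution (land : List (List Int)) : Int :=
  let rows : Int := land.length
  let cols : Int := ((PySem.List.pyGetD land 0 []).length : Int)
  let fuel : Nat := land.length * (PySem.List.pyGetD land 0 []).length + 1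
  let V0 : List (List Int) :=
    List.replicate land.length (List.replicate (PySem.List.pyGetD land 0 []).length 0)
  let st := (PySem.List.pyRange 0 rows 1).foldl (fun st i =>
      (PySem.List.pyRange 0 cols 1).foldl (fun st j =>
        if pvGGet st.2.1 i j = 1 ∧ pvGGet st.1 i j = 0 then
          let r := pvBfsA fuel rows cols st.2.2 st.1 st.2.1 i j
          (r.1, r.2, st.2.2 + 1)
        else st) st) ((V0, land, 2) : List (List Int) × List (List Int) × Int)
  let answer := (PySem.List.pyRange 0 cols 1).foldl (fun ans i =>
      let td := (PySem.List.pyRange 0 rows 1).foldl (fun td j =>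
          if 2 ≤ pvGGet st.2.1 j i ∧ ¬ pvGGet st.2.1 j i ∈ td.2 then
            (td.1 + pvGGet st.1 j i, td.2 ++ [pvGGet st.2.1 j i])
          else td) ((0 : Int), ([] : List Int))
      ans ++ [td.1]) ([] : List Int)
  (PySem.List.max? answer (fun x => x)).getD 0

-- ===== PORT B =====
-- union-find on flat cell indices i*cols+j
def pvFind (parent : List Int) : Nat → Int → Int
  | 0, x => x
  | fuel + 1, x =>
    if PySem.List.pyGetD parent x 0 ≠ x then
      pvFind parent fuel (PySem.List.pyGetD parent x 0)
    else x

-- B's `find` while loop; the fuel only makes it total (parent chains strictly decrease)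
def pvFindF (parent : List Int) (x : Int) : Int := pvFind parent (parent.length + 1) x

def pvUnionB (parent : List Int) (a b : Int) : List Int :=
  let ra := pvFindF parent a
  let rb := pvFindF parent b
  if ra < rb then PySem.List.pySetD parent rb ra
  else if rb < ra then PySem.List.pySetD parent ra rb
  else parent

def solution_alt (land : List (List Int)) : Int :=
  let rows : Int := land.length
  let colsN : Nat := (PySem.List.pyGetD land 0 []).length
  let cols : Int := (colsN : Int)
  let parent := (PySem.List.pyRange 0 rows 1).foldl (fun par i =>
      (PySem.List.pyRange 0 cols 1).foldl (fun par j =>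
        if pvGGet land i j ≠ 0 then
          let par1 := if j + 1 < cols ∧ pvGGet land i (j + 1) ≠ 0 then
              pvUnionB par (i * cols + j) (i * cols + j + 1) else par
          if i + 1 < rows ∧ pvGGet land (i + 1) j ≠ 0 then
              pvUnionB par1 (i * cols + j) ((i + 1) * cols + j) else par1
        else par) par)
    (PySem.List.pyRange 0 (rows * cols) 1)
  let label := (PySem.List.pyRange 0 rows 1).foldl (fun lab i =>
      (PySem.List.pyRange 0 cols 1).foldl (fun lab j =>
        if pvGGet land i j = 1 then
          let r := pvFindF parent (i * cols + j)
          if ¬ lab.contains r then lab.insert r (2 + (lab.size : Int)) else lab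
        else lab) lab) (PySem.Dict.empty : PySem.Dict Int Int)
  let size := (PySem.List.pyRange 0 rows 1).foldl (fun sz i =>
      (PySem.List.pyRange 0 cols 1).foldl (fun sz j =>
        if pvGGet land i j ≠ 0 then
          let r := pvFindF parent (i * cols + j)
          if label.contains r then
            sz.insert (label.getD r 0) (sz.getD (label.getD r 0) 0 + 1)
          else sz
        else sz) sz) (PySem.Dict.empty : PySem.Dict Int Int)
  let al := (PySem.List.pyRange 0 rows 1).foldl (fun al i =>
      (PySem.List.pyRange 0 cols 1).foldl (fun al j =>
        if pvGGet al.2 i j ≠ 0 then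
          let r := pvFindF parent (i * cols + j)
          if label.contains r then
            (pvGSet al.1 i j (size.getD (label.getD r 0) 0),
             pvGSet al.2 i j (label.getD r 0))
          else al
        else al) al)
    ((List.replicate land.length (List.replicate colsN (0 : Int)), land) :
      List (List Int) × List (List Int))
  (PySem.List.pyRange 0 cols 1).foldl (fun best j =>
      max best ((PySem.List.pyRange 0 rows 1).foldl (fun ts i =>
        let v := pvGGet al.2 i j
        if 2 ≤ v ∧ ¬ PySem.Set.contains ts.2 v then
          (ts.1 + pvGGet al.1 i j, PySem.Set.add ts.2 v)
        else ts) ((0 : Int), (PySem.Set.empty : PySem.Set Int))).1)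
    (0 : Int)

-- ===== PRECONDITION & SPEC =====
-- Pre_ excludes exactly the inputs where the Python A raises: the empty grid and an empty
-- first row (IndexError on land[0][...] / ValueError from max([])), and grids with a row
-- shorter than the first row (IndexError while scanning columns).
def Pre_solution (land : List (List Int)) : Prop :=
  land ≠ [] ∧ 0 < (PySem.List.pyGetD land 0 []).length ∧
    ∀ row ∈ land, (PySem.List.pyGetD land 0 []).length ≤ row.length
instance (land : List (List Int)) : Decidable (Pre_solution land) := by
  unfold Pre_solution; infer_instance

def pvWitness_solution : List (List Int) := [[1, 0, 1], [0, 1, 1]]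

def Spec_solution (land : List (List Int)) (out : Int) : Prop := out = solution_alt land
instance (land : List (List Int)) (out : Int) : Decidable (Spec_solution land out) := by
  unfold Spec_solution; infer_instance

-- ===== CLAIM (what is proved, stated in full; the proofs are below) =====
def Claim_equal_solution : Prop :=
  ∀ (land : List (List Int)), Dom_solution land → Pre_solution land →
    Spec_solution land (solution land)

-- ===== LEMMAS AND PROOFS =====


-- ---------- proof-side helpers: grids ----------

def pvColsN (land : List (List Int)) : Nat := (PySem.List.pyGetD land 0 []).length

def pvSh (land g : List (List Int)) : Prop :=
  g.length = land.length ∧ ∀ row ∈ g, pvColsN land ≤ row.length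

def pvInB (land : List (List Int)) (p : Int × Int) : Prop :=
  0 ≤ p.1 ∧ p.1 < (land.length : Int) ∧ 0 ≤ p.2 ∧ p.2 < (pvColsN land : Int)

theorem pvSh_land (land : List (List Int)) (hpre : Pre_solution land) : pvSh land land :=
  ⟨rfl, hpre.2.2⟩

theorem pvGGet_elem (g : List (List Int)) (r c : Int) (h0 : 0 ≤ r)
    (h1 : r.toNat < g.length) (h2 : 0 ≤ c) (h3 : c.toNat < (g[r.toNat]).length) :
    pvGGet g r c = g[r.toNat][c.toNat] := by
  unfold pvGGet
  rw [PySem.List.pyGetD_eq_getElem _ _ h0 (by omega), PySem.List.pyGetD_eq_getElem _ _ h2 (by omega)]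

theorem pvGSet_elem (g : List (List Int)) (r c v : Int) (h0 : 0 ≤ r)
    (h1 : r.toNat < g.length) (h2 : 0 ≤ c) :
    pvGSet g r c v = g.set r.toNat ((g[r.toNat]).set c.toNat v) := by
  unfold pvGSet
  rw [PySem.List.pySetD_of_nonneg _ _ h0, PySem.List.pySetD_of_nonneg _ _ h2,
    PySem.List.pyGetD_eq_getElem _ _ h0 (by omega)]

theorem pvSh_gset (land g : List (List Int)) (r c v : Int) (hg : pvSh land g)
    (hr : 0 ≤ r) (hc : 0 ≤ c) : pvSh land (pvGSet g r c v) := by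
  by_cases hlt : r.toNat < g.length
  · rw [pvGSet_elem g r c v hr hlt hc]
    refine ⟨by simpa using hg.1, ?_⟩
    intro row hrow
    rcases List.mem_or_eq_of_mem_set hrow with h | h
    · exact hg.2 row h
    · subst h
      rw [List.length_set]
      exact hg.2 _ (List.getElem_mem hlt)
  · unfold pvGSet
    rw [PySem.List.pySetD_of_nonneg _ _ hr, List.set_eq_of_length_le (by omega)]
    exact hg

theorem pvGGet_gset (land g : List (List Int)) (t p : Int × Int) (v : Int)
    (hg : pvSh land g) (ht : pvInB land t) (hp : pvInB land p) :
    pvGGet (pvGSet g t.1 t.2 v) p.1 p.2 = if p = t then v else pvGGet g p.1 p.2 := by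
  obtain ⟨hgl, hgr⟩ := hg
  obtain ⟨ht1, ht2, ht3, ht4⟩ := ht
  obtain ⟨hp1, hp2, hp3, hp4⟩ := hp
  have htr : t.1.toNat < g.length := by omega
  have hpr : p.1.toNat < g.length := by omega
  have htc : t.2.toNat < (g[t.1.toNat]).length := by
    have := hgr _ (List.getElem_mem htr); omega
  have hpc : p.2.toNat < (g[p.1.toNat]).length := by
    have := hgr _ (List.getElem_mem hpr); omega
  rw [pvGSet_elem g t.1 t.2 v ht1 htr ht3,
      pvGGet_elem _ p.1 p.2 hp1 (by simpa using hpr) hp3 ?hc,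
      pvGGet_elem g p.1 p.2 hp1 hpr hp3 hpc]
  case hc =>
    rw [List.getElem_set]
    split
    · next h => rw [List.length_set]; exact lt_of_lt_of_le hpc (by simp [h])
    · exact hpc
  by_cases hpt : p = t
  · subst hpt
    simp
  · have hr : t.1.toNat = p.1.toNat → t.2.toNat ≠ p.2.toNat := by
      intro h1 h2
      exact hpt (Prod.ext (by omega) (by omega))
    by_cases h1 : t.1.toNat = p.1.toNat
    · simp [h1, hr h1, hpt]
    · simp [h1, hpt]

theorem pvGGet_replicate (land : List (List Int)) (p : Int × Int) (hp : pvInB land p) :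
    pvGGet (List.replicate land.length (List.replicate (pvColsN land) (0 : Int))) p.1 p.2
      = 0 := by
  obtain ⟨hp1, hp2, hp3, hp4⟩ := hp
  rw [pvGGet_elem _ p.1 p.2 hp1 (by simp; omega) hp3 (by simp; omega)]
  simp

-- ---------- connectivity over the original grid ----------

def pvNz (land : List (List Int)) (p : Int × Int) : Prop := pvGGet land p.1 p.2 ≠ 0

def pvAdj (land : List (List Int)) (p q : Int × Int) : Prop :=
  pvInB land p ∧ pvInB land q ∧ pvNz land p ∧ pvNz land q ∧
    ((p.1 = q.1 ∧ (q.2 = p.2 + 1 ∨ p.2 = q.2 + 1)) ∨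
     (p.2 = q.2 ∧ (q.1 = p.1 + 1 ∨ p.1 = q.1 + 1)))

def pvConn (land : List (List Int)) : (Int × Int) → (Int × Int) → Prop :=
  Relation.ReflTransGen (pvAdj land)

theorem pvAdj_symm (land : List (List Int)) {p q : Int × Int} (h : pvAdj land p q) :
    pvAdj land q p := by
  obtain ⟨h1, h2, h3, h4, h5⟩ := h
  exact ⟨h2, h1, h4, h3, by tauto⟩

theorem pvConn_symm (land : List (List Int)) {p q : Int × Int} (h : pvConn land p q) :
    pvConn land q p :=
  Relation.ReflTransGen.symmetric (fun _ _ hh => pvAdj_symm land hh) h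

theorem pvConn_trans (land : List (List Int)) {p q r : Int × Int}
    (h1 : pvConn land p q) (h2 : pvConn land q r) : pvConn land p r :=
  Relation.ReflTransGen.trans h1 h2

theorem pvConn_props (land : List (List Int)) {s p : Int × Int}
    (hs : pvInB land s ∧ pvNz land s) (h : pvConn land s p) :
    pvInB land p ∧ pvNz land p := by
  induction h with
  | refl => exact hs
  | tail _ hadj ih => exact ⟨hadj.2.1, hadj.2.2.2.1⟩


-- ---------- union-find: roots of the parent array ----------

def pvPWf (par : List Int) : Prop :=
  ∀ (k : Nat) (h : k < par.length), 0 ≤ par[k] ∧ par[k] ≤ (k : Int)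

theorem pvParGet (par : List Int) (x : Int) (h0 : 0 ≤ x) (h1 : x < (par.length : Int)) :
    PySem.List.pyGetD par x 0 = par[x.toNat]'(by omega) :=
  PySem.List.pyGetD_eq_getElem par 0 h0 (by omega)

theorem pvFind_stable (par : List Int) (hwf : pvPWf par) :
    ∀ (n : Nat) (x : Int) (f1 f2 : Nat), 0 ≤ x → x < (par.length : Int) → x.toNat ≤ n →
      x.toNat < f1 → x.toNat < f2 → pvFind par f1 x = pvFind par f2 x := by
  intro n
  induction n with
  | zero =>
    intro x f1 f2 h0 h1 hn hf1 hf2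
    obtain ⟨g1, rfl⟩ : ∃ k, f1 = k + 1 := ⟨f1 - 1, by omega⟩
    obtain ⟨g2, rfl⟩ : ∃ k, f2 = k + 1 := ⟨f2 - 1, by omega⟩
    have hx0 : x = 0 := by omega
    subst hx0
    have hy := hwf 0 (by omega)
    have hfix : PySem.List.pyGetD par 0 0 = 0 := by
      rw [pvParGet par 0 le_rfl h1]
      have := hwf 0 (by omega)
      simp at this ⊢
      omega
    simp [pvFind, hfix]
  | succ n ih =>
    intro x f1 f2 h0 h1 hn hf1 hf2
    obtain ⟨g1, rfl⟩ : ∃ k, f1 = k + 1 := ⟨f1 - 1, by omega⟩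
    obtain ⟨g2, rfl⟩ : ∃ k, f2 = k + 1 := ⟨f2 - 1, by omega⟩
    have hb := hwf x.toNat (by omega)
    have hget : PySem.List.pyGetD par x 0 = par[x.toNat]'(by omega) :=
      pvParGet par x h0 h1
    by_cases hfix : PySem.List.pyGetD par x 0 = x
    · simp [pvFind, hfix]
    · have hy0 : 0 ≤ PySem.List.pyGetD par x 0 := by rw [hget]; exact hb.1
      have hyx : PySem.List.pyGetD par x 0 < x := by
        rw [hget]
        rcases lt_or_eq_of_le hb.2 with h | h
        · omega
        · exfalso; apply hfix; rw [hget, h]; omega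
      have hrec : ∀ g : Nat, x.toNat < g + 1 →
          pvFind par (g + 1) x = pvFind par g (PySem.List.pyGetD par x 0) := by
        intro g hg
        simp [pvFind, hfix]
      rw [hrec g1 hf1, hrec g2 hf2]
      exact ih (PySem.List.pyGetD par x 0) g1 g2 hy0 (by omega) (by omega) (by omega) (by omega)

theorem pvFindF_of_fix (par : List Int) (x : Int) (h0 : 0 ≤ x) (h1 : x < (par.length : Int))
    (h : PySem.List.pyGetD par x 0 = x) : pvFindF par x = x := by
  unfold pvFindF
  obtain ⟨g, hg⟩ : ∃ k, par.length + 1 = k + 1 := ⟨par.length, rfl⟩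
  rw [hg]
  simp [pvFind, h]

theorem pvFindF_step (par : List Int) (hwf : pvPWf par) (x : Int)
    (h0 : 0 ≤ x) (h1 : x < (par.length : Int)) (h : PySem.List.pyGetD par x 0 ≠ x) :
    pvFindF par x = pvFindF par (PySem.List.pyGetD par x 0) := by
  have hb := hwf x.toNat (by omega)
  have hget := pvParGet par x h0 h1
  have hy0 : 0 ≤ PySem.List.pyGetD par x 0 := by rw [hget]; exact hb.1
  have hyx : PySem.List.pyGetD par x 0 < x := by
    rw [hget]
    rcases lt_or_eq_of_le hb.2 with hh | hh
    · omega
    · exfalso; apply h; rw [hget, hh]; omega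
  have hmain : pvFindF par x = pvFind par par.length (PySem.List.pyGetD par x 0) := by
    unfold pvFindF
    obtain ⟨g, hg⟩ : ∃ k, par.length + 1 = k + 1 := ⟨par.length, rfl⟩
    rw [hg]
    simp only [pvFind]
    rw [if_pos h]
    have : g = par.length := by omega
    rw [this]
  rw [hmain]
  exact pvFind_stable par hwf (PySem.List.pyGetD par x 0).toNat _ par.length (par.length + 1)
    hy0 (by omega) le_rfl (by omega) (by omega)

theorem pvFindF_spec (par : List Int) (hwf : pvPWf par) :
    ∀ (n : Nat) (x : Int), 0 ≤ x → x < (par.length : Int) → x.toNat ≤ n →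
      0 ≤ pvFindF par x ∧ pvFindF par x ≤ x ∧
        PySem.List.pyGetD par (pvFindF par x) 0 = pvFindF par x := by
  intro n
  induction n with
  | zero =>
    intro x h0 h1 hn
    have hx : x = 0 := by omega
    subst hx
    have hb := hwf 0 (by omega)
    have hfix : PySem.List.pyGetD par 0 0 = 0 := by
      rw [pvParGet par 0 le_rfl h1]; simp at hb ⊢; omega
    rw [pvFindF_of_fix par 0 le_rfl h1 hfix]
    exact ⟨le_rfl, le_rfl, hfix⟩
  | succ n ih =>
    intro x h0 h1 hn
    by_cases hfix : PySem.List.pyGetD par x 0 = x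
    · rw [pvFindF_of_fix par x h0 h1 hfix]
      exact ⟨h0, le_rfl, hfix⟩
    · have hb := hwf x.toNat (by omega)
      have hget := pvParGet par x h0 h1
      have hy0 : 0 ≤ PySem.List.pyGetD par x 0 := by rw [hget]; exact hb.1
      have hyx : PySem.List.pyGetD par x 0 < x := by
        rw [hget]
        rcases lt_or_eq_of_le hb.2 with hh | hh
        · omega
        · exfalso; apply hfix; rw [hget, hh]; omega
      rw [pvFindF_step par hwf x h0 h1 hfix]
      have := ih (PySem.List.pyGetD par x 0) hy0 (by omega) (by omega)
      exact ⟨this.1, le_trans this.2.1 (by omega), this.2.2⟩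

theorem pvFindF_bounds (par : List Int) (hwf : pvPWf par) (x : Int)
    (h0 : 0 ≤ x) (h1 : x < (par.length : Int)) :
    0 ≤ pvFindF par x ∧ pvFindF par x ≤ x ∧
      PySem.List.pyGetD par (pvFindF par x) 0 = pvFindF par x :=
  pvFindF_spec par hwf x.toNat x h0 h1 le_rfl

theorem pvPWf_set (par : List Int) (hwf : pvPWf par) (t u : Int)
    (ht0 : 0 ≤ t) (ht : t < (par.length : Int)) (hu0 : 0 ≤ u) (hut : u < t) :
    pvPWf (par.set t.toNat u) := by
  intro k hk
  rw [List.getElem_set]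
  split
  · next h => constructor <;> omega
  · exact hwf k (by simpa using hk)

theorem pvFindF_set (par : List Int) (hwf : pvPWf par) (t u : Int)
    (ht0 : 0 ≤ t) (ht : t < (par.length : Int))
    (htroot : PySem.List.pyGetD par t 0 = t)
    (hu0 : 0 ≤ u) (hut : u < t) :
    ∀ (n : Nat) (x : Int), 0 ≤ x → x < (par.length : Int) → x.toNat ≤ n →
      pvFindF (par.set t.toNat u) x =
        if pvFindF par x = t then pvFindF par u else pvFindF par x := by
  have hwf' := pvPWf_set par hwf t u ht0 ht hu0 hut
  have hlen : (par.set t.toNat u).length = par.length := by simp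
  have hgets : ∀ y : Int, 0 ≤ y → y < (par.length : Int) →
      PySem.List.pyGetD (par.set t.toNat u) y 0 =
        if y = t then u else PySem.List.pyGetD par y 0 := by
    intro y hy0 hy1
    rw [pvParGet _ y hy0 (by omega), pvParGet par y hy0 hy1]
    rw [List.getElem_set]
    split
    · next h => rw [if_pos (by omega)]
    · next h => rw [if_neg (by omega)]
  intro n
  induction n with
  | zero =>
    intro x h0 h1 hn
    have hx : x = 0 := by omega
    subst hx
    have hb := hwf 0 (by omega)
    have hfix : PySem.List.pyGetD par 0 0 = 0 := by
      rw [pvParGet par 0 le_rfl h1]; simp at hb ⊢; omega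
    have hr0 : pvFindF par 0 = 0 := pvFindF_of_fix par 0 le_rfl h1 hfix
    have h0t : (0 : Int) ≠ t := by omega
    have hfix' : PySem.List.pyGetD (par.set t.toNat u) 0 0 = 0 := by
      rw [hgets 0 le_rfl h1, if_neg h0t]; exact hfix
    rw [pvFindF_of_fix _ 0 le_rfl (by omega) hfix', hr0, if_neg h0t]
  | succ n ih =>
    intro x h0 h1 hn
    by_cases hxt : x = t
    · subst hxt
      have hget' : PySem.List.pyGetD (par.set x.toNat u) x 0 = u := by
        rw [hgets x h0 h1, if_pos rfl]
      have hstep : pvFindF (par.set x.toNat u) x =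
          pvFindF (par.set x.toNat u) (PySem.List.pyGetD (par.set x.toNat u) x 0) :=
        pvFindF_step _ hwf' x h0 (by omega) (by rw [hget']; omega)
      rw [hstep, hget', ih u hu0 (by omega) (by omega)]
      have hru : pvFindF par u ≤ u := (pvFindF_bounds par hwf u hu0 (by omega)).2.1
      rw [if_neg (by omega)]
      rw [pvFindF_of_fix par x h0 h1 htroot, if_pos rfl]
    · by_cases hfix : PySem.List.pyGetD par x 0 = x
      · have hfix' : PySem.List.pyGetD (par.set t.toNat u) x 0 = x := by
          rw [hgets x h0 h1, if_neg hxt]; exact hfix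
        rw [pvFindF_of_fix _ x h0 (by omega) hfix', pvFindF_of_fix par x h0 h1 hfix,
          if_neg hxt]
      · have hb := hwf x.toNat (by omega)
        have hget := pvParGet par x h0 h1
        have hy0 : 0 ≤ PySem.List.pyGetD par x 0 := by rw [hget]; exact hb.1
        have hyx : PySem.List.pyGetD par x 0 < x := by
          rw [hget]
          rcases lt_or_eq_of_le hb.2 with hh | hh
          · omega
          · exfalso; apply hfix; rw [hget, hh]; omega
        have hfix' : PySem.List.pyGetD (par.set t.toNat u) x 0 =
            PySem.List.pyGetD par x 0 := by
          rw [hgets x h0 h1, if_neg hxt]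
        rw [pvFindF_step _ hwf' x h0 (by omega) (by rw [hfix']; exact hfix), hfix',
          ih (PySem.List.pyGetD par x 0) hy0 (by omega) (by omega),
          pvFindF_step par hwf x h0 h1 hfix]

theorem pvUnionB_spec (par : List Int) (hwf : pvPWf par) (a b : Int)
    (ha0 : 0 ≤ a) (ha : a < (par.length : Int)) (hb0 : 0 ≤ b) (hb : b < (par.length : Int)) :
    (pvUnionB par a b).length = par.length ∧ pvPWf (pvUnionB par a b) ∧
    ∀ x, 0 ≤ x → x < (par.length : Int) →
      pvFindF (pvUnionB par a b) x =
        if pvFindF par x = pvFindF par a ∨ pvFindF par x = pvFindF par b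
        then min (pvFindF par a) (pvFindF par b) else pvFindF par x := by
  have hsa := pvFindF_bounds par hwf a ha0 ha
  have hsb := pvFindF_bounds par hwf b hb0 hb
  have hra := pvFindF_of_fix par _ hsa.1 (by omega) hsa.2.2
  have hrb := pvFindF_of_fix par _ hsb.1 (by omega) hsb.2.2
  unfold pvUnionB
  by_cases hab : pvFindF par a < pvFindF par b
  · rw [if_pos hab]
    rw [PySem.List.pySetD_of_nonneg _ _ hsb.1]
    have hset := pvFindF_set par hwf (pvFindF par b) (pvFindF par a) hsb.1 (by omega)
      hsb.2.2 hsa.1 hab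
    refine ⟨by simp, pvPWf_set par hwf _ _ hsb.1 (by omega) hsa.1 hab, ?_⟩
    intro x h0 h1
    rw [hset x.toNat x h0 h1 le_rfl, hra]
    by_cases h2 : pvFindF par x = pvFindF par b
    · rw [if_pos h2, if_pos (Or.inr h2)]
      omega
    · rw [if_neg h2]
      by_cases h3 : pvFindF par x = pvFindF par a
      · rw [if_pos (Or.inl h3), h3]
        omega
      · rw [if_neg (by tauto)]
  · rw [if_neg hab]
    by_cases hba : pvFindF par b < pvFindF par a
    · rw [if_pos hba]
      rw [PySem.List.pySetD_of_nonneg _ _ hsa.1]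
      have hset := pvFindF_set par hwf (pvFindF par a) (pvFindF par b) hsa.1 (by omega)
        hsa.2.2 hsb.1 hba
      refine ⟨by simp, pvPWf_set par hwf _ _ hsa.1 (by omega) hsb.1 hba, ?_⟩
      intro x h0 h1
      rw [hset x.toNat x h0 h1 le_rfl, hrb]
      by_cases h2 : pvFindF par x = pvFindF par a
      · rw [if_pos h2, if_pos (Or.inl h2)]
        omega
      · rw [if_neg h2]
        by_cases h3 : pvFindF par x = pvFindF par b
        · rw [if_pos (Or.inr h3), h3]
          omega
        · rw [if_neg (by tauto)]
    · rw [if_neg hba]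
      have heq : pvFindF par a = pvFindF par b := by omega
      refine ⟨rfl, hwf, ?_⟩
      intro x h0 h1
      by_cases h2 : pvFindF par x = pvFindF par a
      · rw [if_pos (Or.inl h2), h2, heq]
        omega
      · rw [if_neg (by rw [← heq]; tauto)]


-- ---------- generic equivalence-closure lemmas ----------

theorem pvEqvGen_congr {α : Type} {E F : α → α → Prop} (h : ∀ u v, E u v ↔ F u v)
    {x y : α} : Relation.EqvGen E x y ↔ Relation.EqvGen F x y :=
  ⟨Relation.EqvGen.mono (fun u v hh => (h u v).mp hh),
   Relation.EqvGen.mono (fun u v hh => (h u v).mpr hh)⟩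

theorem pvEqvGen_empty {α : Type} {E : α → α → Prop} (h : ∀ u v, ¬ E u v) {x y : α} :
    Relation.EqvGen E x y ↔ x = y := by
  constructor
  · intro hg
    induction hg with
    | rel u v huv => exact absurd huv (h u v)
    | refl => rfl
    | symm u v _ ih => exact ih.symm
    | trans u v w _ _ ih1 ih2 => exact ih1.trans ih2
  · rintro rfl
    exact Relation.EqvGen.refl x

theorem pvEqvGen_insert {α : Type} (E : α → α → Prop) (a b : α) (x y : α) :
    Relation.EqvGen (fun u v => E u v ∨ (u = a ∧ v = b)) x y ↔
      (Relation.EqvGen E x y ∨ (Relation.EqvGen E x a ∧ Relation.EqvGen E b y) ∨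
        (Relation.EqvGen E x b ∧ Relation.EqvGen E a y)) := by
  constructor
  · intro hg
    induction hg with
    | rel u v huv =>
      rcases huv with h | ⟨rfl, rfl⟩
      · exact Or.inl (Relation.EqvGen.rel _ _ h)
      · exact Or.inr (Or.inl ⟨Relation.EqvGen.refl _, Relation.EqvGen.refl _⟩)
    | refl => exact Or.inl (Relation.EqvGen.refl _)
    | symm u v _ ih =>
      rcases ih with h | ⟨h1, h2⟩ | ⟨h1, h2⟩
      · exact Or.inl (Relation.EqvGen.symm _ _ h)
      · exact Or.inr (Or.inr ⟨Relation.EqvGen.symm _ _ h2, Relation.EqvGen.symm _ _ h1⟩)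
      · exact Or.inr (Or.inl ⟨Relation.EqvGen.symm _ _ h2, Relation.EqvGen.symm _ _ h1⟩)
    | trans u v w _ _ ih1 ih2 =>
      rcases ih1 with h | ⟨h1, h2⟩ | ⟨h1, h2⟩ <;> rcases ih2 with g | ⟨g1, g2⟩ | ⟨g1, g2⟩
      · exact Or.inl (Relation.EqvGen.trans _ _ _ h g)
      · exact Or.inr (Or.inl ⟨Relation.EqvGen.trans _ _ _ h g1, g2⟩)
      · exact Or.inr (Or.inr ⟨Relation.EqvGen.trans _ _ _ h g1, g2⟩)
      · exact Or.inr (Or.inl ⟨h1, Relation.EqvGen.trans _ _ _ h2 g⟩)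
      · exact Or.inr (Or.inl ⟨h1, g2⟩)
      · exact Or.inl (Relation.EqvGen.trans _ _ _ h1 g2)
      · exact Or.inr (Or.inr ⟨h1, Relation.EqvGen.trans _ _ _ h2 g⟩)
      · exact Or.inl (Relation.EqvGen.trans _ _ _ h1 g2)
      · exact Or.inr (Or.inr ⟨h1, g2⟩)
  · intro hg
    have hpair : Relation.EqvGen (fun u v => E u v ∨ (u = a ∧ v = b)) a b :=
      Relation.EqvGen.rel _ _ (Or.inr ⟨rfl, rfl⟩)
    have hmono : ∀ {u v : α}, Relation.EqvGen E u v →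
        Relation.EqvGen (fun u v => E u v ∨ (u = a ∧ v = b)) u v :=
      fun hh => Relation.EqvGen.mono (fun _ _ h1 => Or.inl h1) hh
    rcases hg with h | ⟨h1, h2⟩ | ⟨h1, h2⟩
    · exact hmono h
    · exact Relation.EqvGen.trans _ _ _ (hmono h1)
        (Relation.EqvGen.trans _ _ _ hpair (hmono h2))
    · exact Relation.EqvGen.trans _ _ _ (hmono h1)
        (Relation.EqvGen.trans _ _ _ (Relation.EqvGen.symm _ _ hpair) (hmono h2))

-- ---------- cell encoding and right/down edges ----------

def pvEncI (land : List (List Int)) (p : Int × Int) : Int :=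
  p.1 * ((pvColsN land : Nat) : Int) + p.2

theorem pvEncI_bounds (land : List (List Int)) (p : Int × Int) (hp : pvInB land p) :
    0 ≤ pvEncI land p ∧ pvEncI land p < ((land.length * pvColsN land : Nat) : Int) := by
  obtain ⟨h1, h2, h3, h4⟩ := hp
  unfold pvEncI
  have hC : (0 : Int) ≤ (pvColsN land : Int) := by positivity
  have hm1 : 0 ≤ p.1 * (pvColsN land : Int) := mul_nonneg h1 hC
  have hm2 : (p.1 + 1) * (pvColsN land : Int) ≤ (land.length : Int) * (pvColsN land : Int) :=
    mul_le_mul_of_nonneg_right (by omega) hC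
  have hcast : ((land.length * pvColsN land : Nat) : Int)
      = (land.length : Int) * (pvColsN land : Int) := by push_cast; ring
  have hexp : (p.1 + 1) * (pvColsN land : Int)
      = p.1 * (pvColsN land : Int) + (pvColsN land : Int) := by ring
  omega

theorem pvEncI_inj (land : List (List Int)) (p q : Int × Int)
    (hp : pvInB land p) (hq : pvInB land q) (h : pvEncI land p = pvEncI land q) : p = q := by
  obtain ⟨h1, h2, h3, h4⟩ := hp
  obtain ⟨g1, g2, g3, g4⟩ := hq
  unfold pvEncI at h
  have hC : (0 : Int) ≤ (pvColsN land : Int) := by positivity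
  have hfst : p.1 = q.1 := by
    rcases lt_trichotomy p.1 q.1 with hlt | heq | hgt
    · have : (p.1 + 1) * (pvColsN land : Int) ≤ q.1 * (pvColsN land : Int) :=
        mul_le_mul_of_nonneg_right (by omega) hC
      have hexp : (p.1 + 1) * (pvColsN land : Int)
          = p.1 * (pvColsN land : Int) + (pvColsN land : Int) := by ring
      omega
    · exact heq
    · have : (q.1 + 1) * (pvColsN land : Int) ≤ p.1 * (pvColsN land : Int) :=
        mul_le_mul_of_nonneg_right (by omega) hC
      have hexp : (q.1 + 1) * (pvColsN land : Int)
          = q.1 * (pvColsN land : Int) + (pvColsN land : Int) := by ring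
      omega
  have hsnd : p.2 = q.2 := by rw [hfst] at h; omega
  exact Prod.ext hfst hsnd

def pvRD (land : List (List Int)) (p q : Int × Int) : Prop :=
  pvInB land p ∧ pvInB land q ∧ pvNz land p ∧ pvNz land q ∧
    (q = (p.1, p.2 + 1) ∨ q = (p.1 + 1, p.2))

def pvEdge (land : List (List Int)) (t : Int) (p q : Int × Int) : Prop :=
  pvRD land p q ∧ pvEncI land p < t

-- the invariant coupling roots of the parent array with an edge relation
def pvRootInv (land : List (List Int)) (E : (Int × Int) → (Int × Int) → Prop)
    (par : List Int) : Prop :=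
  par.length = land.length * pvColsN land ∧ pvPWf par ∧
  ∀ p q, pvInB land p → pvInB land q →
    (pvFindF par (pvEncI land p) = pvFindF par (pvEncI land q) ↔ Relation.EqvGen E p q)

theorem pvRootInv_congr {land : List (List Int)} {E F : (Int × Int) → (Int × Int) → Prop}
    {par : List Int} (h : ∀ u v, E u v ↔ F u v) (hinv : pvRootInv land E par) :
    pvRootInv land F par :=
  ⟨hinv.1, hinv.2.1, fun p q hp hq =>
    (hinv.2.2 p q hp hq).trans (pvEqvGen_congr h)⟩

theorem pvRootInv_union (land : List (List Int)) (E : (Int × Int) → (Int × Int) → Prop)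
    (par : List Int) (hinv : pvRootInv land E par) (c d : Int × Int)
    (hc : pvInB land c) (hd : pvInB land d) :
    pvRootInv land (fun p q => E p q ∨ (p = c ∧ q = d))
      (pvUnionB par (pvEncI land c) (pvEncI land d)) := by
  obtain ⟨hlen, hwf, hiff⟩ := hinv
  have hcb := pvEncI_bounds land c hc
  have hdb := pvEncI_bounds land d hd
  have hcr : pvEncI land c < (par.length : Int) := by rw [hlen]; exact hcb.2
  have hdr : pvEncI land d < (par.length : Int) := by rw [hlen]; exact hdb.2
  obtain ⟨hlen', hwf', hform⟩ :=
    pvUnionB_spec par hwf (pvEncI land c) (pvEncI land d) hcb.1 hcr hdb.1 hdr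
  refine ⟨by rw [hlen', hlen], hwf', ?_⟩
  intro p q hp hq
  have hpb := pvEncI_bounds land p hp
  have hqb := pvEncI_bounds land q hq
  rw [hform (pvEncI land p) hpb.1 (by rw [hlen]; exact hpb.2),
      hform (pvEncI land q) hqb.1 (by rw [hlen]; exact hqb.2),
      pvEqvGen_insert E c d p q,
      ← hiff p q hp hq, ← hiff p c hp hc, ← hiff d q hd hq,
      ← hiff p d hp hd, ← hiff c q hc hq]
  rcases min_choice (pvFindF par (pvEncI land c)) (pvFindF par (pvEncI land d)) with hm | hm <;>
    rw [hm] <;> split_ifs <;> omega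


-- ---------- structured view of B's union-building loop ----------

def pvUCell (land : List (List Int)) (par : List Int) (i j : Int) : List Int :=
  if pvGGet land i j ≠ 0 then
    let par1 := if j + 1 < ((pvColsN land : Nat) : Int) ∧ pvGGet land i (j + 1) ≠ 0 then
        pvUnionB par (i * ((pvColsN land : Nat) : Int) + j)
          (i * ((pvColsN land : Nat) : Int) + j + 1)
      else par
    if i + 1 < (land.length : Int) ∧ pvGGet land (i + 1) j ≠ 0 then
        pvUnionB par1 (i * ((pvColsN land : Nat) : Int) + j)
          ((i + 1) * ((pvColsN land : Nat) : Int) + j)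
    else par1
  else par

def pvParB (land : List (List Int)) : List Int :=
  (PySem.List.pyRange 0 (land.length : Int) 1).foldl (fun par i =>
    (PySem.List.pyRange 0 ((pvColsN land : Nat) : Int) 1).foldl
      (fun par j => pvUCell land par i j) par)
    (PySem.List.pyRange 0 ((land.length : Int) * ((pvColsN land : Nat) : Int)) 1)

theorem pvUF_cell (land : List (List Int)) (i j : Int)
    (hi0 : 0 ≤ i) (hi1 : i < (land.length : Int)) (hj0 : 0 ≤ j)
    (hj1 : j < ((pvColsN land : Nat) : Int)) (par : List Int)
    (hinv : pvRootInv land (pvEdge land (pvEncI land (i, j))) par) :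
    pvRootInv land (pvEdge land (pvEncI land (i, j) + 1)) (pvUCell land par i j) := by
  have hc : pvInB land (i, j) := ⟨hi0, hi1, hj0, hj1⟩
  unfold pvUCell
  by_cases hnz : pvGGet land i j ≠ 0
  · rw [if_pos hnz]
    have hrc : pvEncI land (i, j) + 1 = pvEncI land (i, j + 1) := by
      unfold pvEncI; ring
    have hdc : (i + 1) * ((pvColsN land : Nat) : Int) + j = pvEncI land (i + 1, j) := by
      unfold pvEncI; ring
    have henc : i * ((pvColsN land : Nat) : Int) + j = pvEncI land (i, j) := rfl
    have hinv1 : pvRootInv land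
        (fun u v => pvEdge land (pvEncI land (i, j)) u v ∨
          ((j + 1 < ((pvColsN land : Nat) : Int) ∧ pvGGet land i (j + 1) ≠ 0) ∧
            u = (i, j) ∧ v = (i, j + 1)))
        (if j + 1 < ((pvColsN land : Nat) : Int) ∧ pvGGet land i (j + 1) ≠ 0 then
          pvUnionB par (i * ((pvColsN land : Nat) : Int) + j)
            (i * ((pvColsN land : Nat) : Int) + j + 1)
        else par) := by
      by_cases hcond : j + 1 < ((pvColsN land : Nat) : Int) ∧ pvGGet land i (j + 1) ≠ 0
      · rw [if_pos hcond, henc, hrc]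
        exact pvRootInv_congr (by intro u v; constructor <;> (intro h; tauto))
          (pvRootInv_union land _ par hinv (i, j) (i, j + 1) hc ⟨hi0, hi1, by omega, hcond.1⟩)
      · rw [if_neg hcond]
        exact pvRootInv_congr (by intro u v; constructor <;> (intro h; tauto)) hinv
    have hinv2 : pvRootInv land
        (fun u v => (pvEdge land (pvEncI land (i, j)) u v ∨
          ((j + 1 < ((pvColsN land : Nat) : Int) ∧ pvGGet land i (j + 1) ≠ 0) ∧
            u = (i, j) ∧ v = (i, j + 1))) ∨
          ((i + 1 < (land.length : Int) ∧ pvGGet land (i + 1) j ≠ 0) ∧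
            u = (i, j) ∧ v = (i + 1, j)))
        (if i + 1 < (land.length : Int) ∧ pvGGet land (i + 1) j ≠ 0 then
          pvUnionB
            (if j + 1 < ((pvColsN land : Nat) : Int) ∧ pvGGet land i (j + 1) ≠ 0 then
              pvUnionB par (i * ((pvColsN land : Nat) : Int) + j)
                (i * ((pvColsN land : Nat) : Int) + j + 1)
            else par)
            (i * ((pvColsN land : Nat) : Int) + j)
            ((i + 1) * ((pvColsN land : Nat) : Int) + j)
        else
          (if j + 1 < ((pvColsN land : Nat) : Int) ∧ pvGGet land i (j + 1) ≠ 0 then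
            pvUnionB par (i * ((pvColsN land : Nat) : Int) + j)
              (i * ((pvColsN land : Nat) : Int) + j + 1)
          else par)) := by
      by_cases hcond : i + 1 < (land.length : Int) ∧ pvGGet land (i + 1) j ≠ 0
      · rw [if_pos hcond, henc, hdc]
        exact pvRootInv_congr (by intro u v; constructor <;> (intro h; tauto))
          (pvRootInv_union land _ _ hinv1 (i, j) (i + 1, j) hc ⟨by omega, hcond.1, hj0, hj1⟩)
      · rw [if_neg hcond]
        exact pvRootInv_congr (by intro u v; constructor <;> (intro h; tauto)) hinv1
    refine pvRootInv_congr ?_ hinv2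
    intro u v
    constructor
    · intro h
      rcases h with (h | ⟨hcond, rfl, rfl⟩) | ⟨hcond, rfl, rfl⟩
      · exact ⟨h.1, by have := h.2; omega⟩
      · exact ⟨⟨hc, ⟨hi0, hi1, by omega, hcond.1⟩, hnz, hcond.2, Or.inl rfl⟩, by omega⟩
      · exact ⟨⟨hc, ⟨by omega, hcond.1, hj0, hj1⟩, hnz, hcond.2, Or.inr rfl⟩, by omega⟩
    · rintro ⟨hrd, hb⟩
      by_cases hlt : pvEncI land u < pvEncI land (i, j)
      · exact Or.inl (Or.inl ⟨hrd, hlt⟩)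
      · have hu : u = (i, j) := pvEncI_inj land u (i, j) hrd.1 hc (by omega)
        subst hu
        rcases hrd.2.2.2.2 with hsh | hsh
        · refine Or.inl (Or.inr ⟨⟨?_, ?_⟩, rfl, hsh⟩)
          · have := hrd.2.1
            rw [hsh] at this
            exact this.2.2.2
          · have := hrd.2.2.2.1
            rw [hsh] at this
            exact this
        · refine Or.inr ⟨⟨?_, ?_⟩, rfl, hsh⟩
          · have := hrd.2.1
            rw [hsh] at this
            exact this.2.1
          · have := hrd.2.2.2.1
            rw [hsh] at this
            exact this
  · rw [if_neg hnz]
    refine pvRootInv_congr ?_ hinv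
    intro u v
    constructor
    · intro h
      exact ⟨h.1, by have := h.2; omega⟩
    · rintro ⟨hrd, hb⟩
      refine ⟨hrd, ?_⟩
      by_cases hlt : pvEncI land u < pvEncI land (i, j)
      · exact hlt
      · exfalso
        have hu : u = (i, j) := pvEncI_inj land u (i, j) hrd.1 ⟨hi0, hi1, hj0, hj1⟩ (by omega)
        have hz := hrd.2.2.1
        rw [hu] at hz
        exact hnz hz

theorem pvUF_inner (land : List (List Int)) (i : Int) (hi0 : 0 ≤ i)
    (hi1 : i < (land.length : Int)) :
    ∀ (n : Nat) (j : Int) (par : List Int), 0 ≤ j → j ≤ ((pvColsN land : Nat) : Int) →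
      (((pvColsN land : Nat) : Int) - j).toNat = n →
      pvRootInv land (pvEdge land (i * ((pvColsN land : Nat) : Int) + j)) par →
      pvRootInv land (pvEdge land ((i + 1) * ((pvColsN land : Nat) : Int)))
        ((PySem.List.pyRange j ((pvColsN land : Nat) : Int) 1).foldl
          (fun par j => pvUCell land par i j) par) := by
  intro n
  induction n with
  | zero =>
    intro j par hj0 hj1 hn hinv
    have hj : j = ((pvColsN land : Nat) : Int) := by omega
    subst hj
    rw [PySem.List.pyRange_one_eq_nil le_rfl]
    simp only [List.foldl_nil]
    have : i * ((pvColsN land : Nat) : Int) + ((pvColsN land : Nat) : Int)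
        = (i + 1) * ((pvColsN land : Nat) : Int) := by ring
    rw [← this]
    exact hinv
  | succ n ih =>
    intro j par hj0 hj1 hn hinv
    have hjlt : j < ((pvColsN land : Nat) : Int) := by omega
    rw [PySem.List.pyRange_one_cons hjlt]
    simp only [List.foldl_cons]
    have hstep := pvUF_cell land i j hi0 hi1 hj0 hjlt par hinv
    have henc : pvEncI land (i, j) + 1 = i * ((pvColsN land : Nat) : Int) + (j + 1) := by
      unfold pvEncI; ring
    rw [henc] at hstep
    exact ih (j + 1) (pvUCell land par i j) (by omega) (by omega) (by omega) hstep

theorem pvUF_outer (land : List (List Int)) :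
    ∀ (n : Nat) (i : Int) (par : List Int), 0 ≤ i → i ≤ (land.length : Int) →
      ((land.length : Int) - i).toNat = n →
      pvRootInv land (pvEdge land (i * ((pvColsN land : Nat) : Int))) par →
      pvRootInv land (pvEdge land ((land.length : Int) * ((pvColsN land : Nat) : Int)))
        ((PySem.List.pyRange i (land.length : Int) 1).foldl (fun par i =>
          (PySem.List.pyRange 0 ((pvColsN land : Nat) : Int) 1).foldl
            (fun par j => pvUCell land par i j) par) par) := by
  intro n
  induction n with
  | zero =>
    intro i par hi0 hi1 hn hinv
    have hi : i = (land.length : Int) := by omega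
    subst hi
    rw [PySem.List.pyRange_one_eq_nil le_rfl]
    simp only [List.foldl_nil]
    exact hinv
  | succ n ih =>
    intro i par hi0 hi1 hn hinv
    have hilt : i < (land.length : Int) := by omega
    rw [PySem.List.pyRange_one_cons hilt]
    simp only [List.foldl_cons]
    have hstep := pvUF_inner land i hi0 hilt (pvColsN land) 0 par le_rfl (by positivity)
      (by omega) (by rw [add_zero]; exact hinv)
    exact ih (i + 1) _ (by omega) (by omega) (by omega) hstep

theorem pvEdge_full_conn (land : List (List Int)) (p q : Int × Int) :
    Relation.EqvGen (pvEdge land ((land.length : Int) * ((pvColsN land : Nat) : Int))) p q ↔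
      pvConn land p q := by
  constructor
  · intro hg
    induction hg with
    | rel u v huv =>
      have hadj : pvAdj land u v := by
        obtain ⟨⟨h1, h2, h3, h4, h5⟩, _⟩ := huv
        refine ⟨h1, h2, h3, h4, ?_⟩
        rcases h5 with h | h <;> rw [h] <;> simp <;> omega
      exact Relation.ReflTransGen.single hadj
    | refl => exact Relation.ReflTransGen.refl
    | symm u v _ ih => exact pvConn_symm land ih
    | trans u v w _ _ ih1 ih2 => exact pvConn_trans land ih1 ih2
  · intro hg
    induction hg with
    | refl => exact Relation.EqvGen.refl _
    | @tail b c hconn hadj ih =>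
      refine Relation.EqvGen.trans _ _ _ ih ?_
      obtain ⟨h1, h2, h3, h4, h5⟩ := hadj
      have hbb := pvEncI_bounds land b h1
      have hcb := pvEncI_bounds land c h2
      have hcast : ((land.length * pvColsN land : Nat) : Int)
          = (land.length : Int) * ((pvColsN land : Nat) : Int) := by push_cast; ring
      rcases h5 with ⟨he, h | h⟩ | ⟨he, h | h⟩
      · exact Relation.EqvGen.rel _ _
          ⟨⟨h1, h2, h3, h4, Or.inl (Prod.ext_iff.mpr ⟨he.symm, h⟩)⟩, by omega⟩
      · exact Relation.EqvGen.symm _ _ (Relation.EqvGen.rel _ _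
          ⟨⟨h2, h1, h4, h3, Or.inl (Prod.ext_iff.mpr ⟨he, h⟩)⟩, by omega⟩)
      · exact Relation.EqvGen.rel _ _
          ⟨⟨h1, h2, h3, h4, Or.inr (Prod.ext_iff.mpr ⟨h, he.symm⟩)⟩, by omega⟩
      · exact Relation.EqvGen.symm _ _ (Relation.EqvGen.rel _ _
          ⟨⟨h2, h1, h4, h3, Or.inr (Prod.ext_iff.mpr ⟨h, he⟩)⟩, by omega⟩)

theorem pvParB_spec (land : List (List Int)) :
    (pvParB land).length = land.length * pvColsN land ∧ pvPWf (pvParB land) ∧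
    ∀ p q, pvInB land p → pvInB land q →
      (pvFindF (pvParB land) (pvEncI land p) = pvFindF (pvParB land) (pvEncI land q) ↔
        pvConn land p q) := by
  have hcast : ((land.length * pvColsN land : Nat) : Int)
      = (land.length : Int) * ((pvColsN land : Nat) : Int) := by push_cast; ring
  have hlen0 : (PySem.List.pyRange 0 ((land.length : Int) * ((pvColsN land : Nat) : Int)) 1).length
      = land.length * pvColsN land := by
    rw [PySem.List.length_pyRange_one, ← hcast]
    omega
  have hget0 : ∀ (k : Nat) (h : k < land.length * pvColsN land),
      (PySem.List.pyRange 0 ((land.length : Int) * ((pvColsN land : Nat) : Int)) 1)[k]'(by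
        rw [hlen0]; exact h) = (k : Int) := by
    intro k h
    rw [PySem.List.getElem_pyRange_one]
    omega
  have hwf0 : pvPWf (PySem.List.pyRange 0 ((land.length : Int) * ((pvColsN land : Nat) : Int)) 1) := by
    intro k hk
    rw [hlen0] at hk
    rw [hget0 k hk]
    omega
  have hfix0 : ∀ x : Int, 0 ≤ x → x < ((land.length * pvColsN land : Nat) : Int) →
      pvFindF (PySem.List.pyRange 0 ((land.length : Int) * ((pvColsN land : Nat) : Int)) 1) x
        = x := by
    intro x h0 h1
    apply pvFindF_of_fix _ x h0 (by rw [hlen0]; omega)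
    rw [pvParGet _ x h0 (by rw [hlen0]; omega)]
    rw [hget0 x.toNat (by omega)]
    omega
  have hinv0 : pvRootInv land (pvEdge land (0 * ((pvColsN land : Nat) : Int)))
      (PySem.List.pyRange 0 ((land.length : Int) * ((pvColsN land : Nat) : Int)) 1) := by
    refine ⟨hlen0, hwf0, ?_⟩
    intro p q hp hq
    have hpb := pvEncI_bounds land p hp
    have hqb := pvEncI_bounds land q hq
    rw [hfix0 _ hpb.1 hpb.2, hfix0 _ hqb.1 hqb.2]
    rw [pvEqvGen_empty (E := pvEdge land (0 * ((pvColsN land : Nat) : Int)))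
      (by
        rintro u v ⟨hrd, hb⟩
        have := (pvEncI_bounds land u hrd.1).1
        omega)]
    constructor
    · intro h
      exact pvEncI_inj land p q hp hq h
    · rintro rfl
      rfl
  have hmain := pvUF_outer land land.length 0
    (PySem.List.pyRange 0 ((land.length : Int) * ((pvColsN land : Nat) : Int)) 1)
    le_rfl (by omega) (by omega) (by rw [zero_mul] at hinv0 ⊢; exact hinv0)
  obtain ⟨h1, h2, h3⟩ := hmain
  exact ⟨h1, h2, fun p q hp hq => (h3 p q hp hq).trans (pvEdge_full_conn land p q)⟩


-- ---------- A's BFS flood fill: semantic characterization ----------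

theorem pvNodup_inB_len (land : List (List Int)) (l : List (Int × Int)) (hnd : l.Nodup)
    (hb : ∀ p ∈ l, pvInB land p) : l.length ≤ land.length * pvColsN land := by
  have hmapnd : (l.map (fun p => (pvEncI land p).toNat)).Nodup := by
    refine List.Nodup.map_on ?_ hnd
    intro x hx y hy hxy
    apply pvEncI_inj land x y (hb x hx) (hb y hy)
    have hxb := pvEncI_bounds land x (hb x hx)
    have hyb := pvEncI_bounds land y (hb y hy)
    omega
  have hsub : (l.map (fun p => (pvEncI land p).toNat)).toFinset ⊆
      Finset.range (land.length * pvColsN land) := by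
    intro k hk
    rw [List.mem_toFinset] at hk
    obtain ⟨p, hp, rfl⟩ := List.mem_map.mp hk
    have hpb := pvEncI_bounds land p (hb p hp)
    rw [Finset.mem_range]
    omega
  have hcard := Finset.card_le_card hsub
  rw [Finset.card_range, List.toFinset_card_of_nodup hmapnd] at hcard
  simpa using hcard

-- the outer-loop facts the flood fill relies on: the seed's component is unvisited,
-- unvisited cells still hold their original value, and visit counts are never negative
def pvFresh (land V₀ L₀ : List (List Int)) (s : Int × Int) : Prop :=
  (∀ q, pvInB land q → pvConn land s q → pvGGet V₀ q.1 q.2 = 0) ∧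
  (∀ q, pvInB land q → pvGGet V₀ q.1 q.2 = 0 →
    pvGGet L₀ q.1 q.2 = pvGGet land q.1 q.2) ∧
  (∀ q, pvInB land q → 0 ≤ pvGGet V₀ q.1 q.2)

def pvBInv (land V₀ L₀ : List (List Int)) (num : Int) (s : Int × Int) (m k : Nat)
    (st : List (List Int) × List (List Int) × List (Int × Int) × List (Int × Int)) : Prop :=
  st.2.2.1 = st.2.2.2.drop m ∧ k ≤ m ∧ m ≤ st.2.2.2.length ∧ st.2.2.2.Nodup ∧
  s ∈ st.2.2.2 ∧
  (∀ p ∈ st.2.2.2, pvInB land p ∧ pvNz land p ∧ pvConn land s p) ∧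
  pvSh land st.1 ∧ pvSh land st.2.1 ∧
  (∀ p, pvInB land p →
    (p ∈ st.2.2.2 → pvGGet st.1 p.1 p.2 = 1 ∧ pvGGet st.2.1 p.1 p.2 = num) ∧
    (p ∉ st.2.2.2 → pvGGet st.1 p.1 p.2 = pvGGet V₀ p.1 p.2 ∧
      pvGGet st.2.1 p.1 p.2 = pvGGet L₀ p.1 p.2)) ∧
  (∀ p ∈ st.2.2.2.take k, ∀ q, pvAdj land p q → q ∈ st.2.2.2)

theorem pvBfsStepA_inv (land V₀ L₀ : List (List Int)) (num : Int) (s : Int × Int)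
    (hfr : pvFresh land V₀ L₀ s) (m k : Nat)
    (st : List (List Int) × List (List Int) × List (Int × Int) × List (Int × Int))
    (hinv : pvBInv land V₀ L₀ num s m k st) (nr nc : Int) (hmem : (nr, nc) ∈ st.2.2.2)
    (d : Int × Int) (hd : d = (0, 1) ∨ d = (0, -1) ∨ d = (1, 0) ∨ d = (-1, 0)) :
    pvBInv land V₀ L₀ num s m k
      (pvBfsStepA (land.length : Int) ((pvColsN land : Nat) : Int) num nr nc st d) ∧
    (∃ suf, (pvBfsStepA (land.length : Int) ((pvColsN land : Nat) : Int) num nr nc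
      st d).2.2.2 = st.2.2.2 ++ suf) ∧
    (pvAdj land (nr, nc) (nr + d.1, nc + d.2) →
      (nr + d.1, nc + d.2) ∈ (pvBfsStepA (land.length : Int) ((pvColsN land : Nat) : Int)
        num nr nc st d).2.2.2) := by
  obtain ⟨V, L, q, vl⟩ := st
  obtain ⟨hq, hk, hm, hnd, hs, hmemall, hShV, hShL, hgrid, hcl⟩ := hinv
  dsimp only at hq hk hm hnd hs hmemall hShV hShL hgrid hcl hmem ⊢
  unfold pvBfsStepA
  dsimp only
  by_cases hb : nr + d.1 < 0 ∨ (land.length : Int) ≤ nr + d.1 ∨ nc + d.2 < 0 ∨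
      ((pvColsN land : Nat) : Int) ≤ nc + d.2
  · rw [if_pos hb]
    refine ⟨⟨hq, hk, hm, hnd, hs, hmemall, hShV, hShL, hgrid, hcl⟩, ⟨[], by simp⟩, ?_⟩
    intro hadj
    exfalso
    obtain ⟨g1, g2, g3, g4⟩ := hadj.2.1
    dsimp only at g1 g2 g3 g4
    omega
  · rw [if_neg hb]
    have htB : pvInB land (nr + d.1, nc + d.2) := ⟨by omega, by omega, by omega, by omega⟩
    have hconn_t : pvAdj land (nr, nc) (nr + d.1, nc + d.2) →
        pvConn land s (nr + d.1, nc + d.2) :=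
      fun hadj => Relation.ReflTransGen.tail (hmemall _ hmem).2.2 hadj
    by_cases hv : 1 ≤ pvGGet V (nr + d.1) (nc + d.2)
    · rw [if_pos hv]
      refine ⟨⟨hq, hk, hm, hnd, hs, hmemall, hShV, hShL, hgrid, hcl⟩, ⟨[], by simp⟩, ?_⟩
      intro hadj
      by_contra htv
      have hold := (hgrid _ htB).2 htv
      have h0 := hfr.1 _ htB (hconn_t hadj)
      dsimp only at hold h0
      omega
    · rw [if_neg hv]
      have htnotin : (nr + d.1, nc + d.2) ∉ vl := by
        intro hin
        have := (hgrid _ htB).1 hin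
        dsimp only at this
        omega
      have hold := (hgrid _ htB).2 htnotin
      dsimp only at hold
      by_cases hz : pvGGet L (nr + d.1) (nc + d.2) = 0
      · rw [if_pos hz]
        refine ⟨⟨hq, hk, hm, hnd, hs, hmemall, hShV, hShL, hgrid, hcl⟩, ⟨[], by simp⟩, ?_⟩
        intro hadj
        exfalso
        have h0 := hfr.1 _ htB (hconn_t hadj)
        have hL0 := hfr.2.1 _ htB h0
        have hnz : pvNz land (nr + d.1, nc + d.2) := hadj.2.2.2.1
        unfold pvNz at hnz
        dsimp only at h0 hL0 hnz
        rw [hold.2, hL0] at hz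
        exact hnz hz
      · rw [if_neg hz]
        have hV0 : pvGGet V₀ (nr + d.1) (nc + d.2) = 0 := by
          have hpos := hfr.2.2 _ htB
          dsimp only at hpos
          omega
        have hL0 := hfr.2.1 _ htB hV0
        dsimp only at hL0
        have hnz : pvNz land (nr + d.1, nc + d.2) := by
          unfold pvNz
          dsimp only
          rw [← hL0, ← hold.2]
          exact hz
        have hadj : pvAdj land (nr, nc) (nr + d.1, nc + d.2) := by
          refine ⟨(hmemall _ hmem).1, htB, (hmemall _ hmem).2.1, hnz, ?_⟩
          rcases hd with rfl | rfl | rfl | rfl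
          · exact Or.inl ⟨by simp, Or.inl (by simp)⟩
          · exact Or.inl ⟨by simp, Or.inr (by simp)⟩
          · exact Or.inr ⟨by simp, Or.inl (by simp)⟩
          · exact Or.inr ⟨by simp, Or.inr (by simp)⟩
        refine ⟨⟨?_, hk, ?_, ?_, ?_, ?_, ?_, ?_, ?_, ?_⟩,
          ⟨[(nr + d.1, nc + d.2)], rfl⟩,
          fun _ => List.mem_append_right _ (List.mem_singleton_self _)⟩
        · dsimp only
          rw [hq, List.drop_append_of_le_length hm]
        · dsimp only
          rw [List.length_append]
          omega
        · dsimp only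
          refine List.Nodup.append hnd (List.nodup_singleton _) ?_
          simp only [List.disjoint_singleton]
          exact htnotin
        · exact List.mem_append_left _ hs
        · intro p hp
          rcases List.mem_append.mp hp with h | h
          · exact hmemall p h
          · rw [List.mem_singleton.mp h]
            exact ⟨htB, hnz, hconn_t hadj⟩
        · exact pvSh_gset land V _ _ _ hShV (by omega) (by omega)
        · exact pvSh_gset land L _ _ _ hShL (by omega) (by omega)
        · intro p hp
          constructor
          · intro hpin
            rcases List.mem_append.mp hpin with h | h
            · have hne : p ≠ (nr + d.1, nc + d.2) := fun he => htnotin (he ▸ h)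
              have hV := pvGGet_gset land V (nr + d.1, nc + d.2) p 1 hShV htB hp
              have hL := pvGGet_gset land L (nr + d.1, nc + d.2) p num hShL htB hp
              rw [hV, hL, if_neg hne, if_neg hne]
              exact (hgrid p hp).1 h
            · have he := List.mem_singleton.mp h
              have hV := pvGGet_gset land V (nr + d.1, nc + d.2) p 1 hShV htB hp
              have hL := pvGGet_gset land L (nr + d.1, nc + d.2) p num hShL htB hp
              rw [hV, hL, if_pos he, if_pos he]
              exact ⟨rfl, rfl⟩
          · intro hpout
            have h1 : p ∉ vl := fun h => hpout (List.mem_append_left _ h)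
            have h2 : p ≠ (nr + d.1, nc + d.2) := fun he =>
              hpout (List.mem_append_right _ (by simp [he]))
            have hV := pvGGet_gset land V (nr + d.1, nc + d.2) p 1 hShV htB hp
            have hL := pvGGet_gset land L (nr + d.1, nc + d.2) p num hShL htB hp
            rw [hV, hL, if_neg h2, if_neg h2]
            exact (hgrid p hp).2 h1
        · intro p hp q'' hq''
          dsimp only at hp
          rw [List.take_append_of_le_length (le_trans hk hm)] at hp
          exact List.mem_append_left _ (hcl p hp q'' hq'')

theorem pvBfsFoldA_inv (land V₀ L₀ : List (List Int)) (num : Int) (s : Int × Int)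
    (hfr : pvFresh land V₀ L₀ s) (m k : Nat)
    (st : List (List Int) × List (List Int) × List (Int × Int) × List (Int × Int))
    (hinv : pvBInv land V₀ L₀ num s m k st) (nr nc : Int) (hmem : (nr, nc) ∈ st.2.2.2) :
    pvBInv land V₀ L₀ num s m k
      ((List.zip [0, 0, 1, -1] [1, -1, 0, 0]).foldl
        (pvBfsStepA (land.length : Int) ((pvColsN land : Nat) : Int) num nr nc) st) ∧
    (∃ suf, ((List.zip [0, 0, 1, -1] [1, -1, 0, 0]).foldl
        (pvBfsStepA (land.length : Int) ((pvColsN land : Nat) : Int) num nr nc)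
        st).2.2.2 = st.2.2.2 ++ suf) ∧
    (∀ q', pvAdj land (nr, nc) q' →
      q' ∈ ((List.zip [0, 0, 1, -1] [1, -1, 0, 0]).foldl
        (pvBfsStepA (land.length : Int) ((pvColsN land : Nat) : Int) num nr nc) st).2.2.2) := by
  have hz : List.zip ([0, 0, 1, -1] : List Int) ([1, -1, 0, 0] : List Int)
      = [(0, 1), (0, -1), (1, 0), (-1, 0)] := rfl
  rw [hz]
  simp only [List.foldl_cons, List.foldl_nil]
  set st1 := pvBfsStepA (land.length : Int) ((pvColsN land : Nat) : Int) num nr nc st (0, 1)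
    with hst1
  set st2 := pvBfsStepA (land.length : Int) ((pvColsN land : Nat) : Int) num nr nc st1 (0, -1)
    with hst2
  set st3 := pvBfsStepA (land.length : Int) ((pvColsN land : Nat) : Int) num nr nc st2 (1, 0)
    with hst3
  set st4 := pvBfsStepA (land.length : Int) ((pvColsN land : Nat) : Int) num nr nc st3 (-1, 0)
    with hst4
  obtain ⟨h1, ⟨s1, hs1⟩, he1⟩ := pvBfsStepA_inv land V₀ L₀ num s hfr m k st hinv nr nc hmem
    (0, 1) (Or.inl rfl)
  have hmem1 : (nr, nc) ∈ st1.2.2.2 := by rw [hs1]; exact List.mem_append_left _ hmem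
  obtain ⟨h2, ⟨s2, hs2⟩, he2⟩ := pvBfsStepA_inv land V₀ L₀ num s hfr m k st1 h1 nr nc hmem1
    (0, -1) (Or.inr (Or.inl rfl))
  have hmem2 : (nr, nc) ∈ st2.2.2.2 := by rw [hs2]; exact List.mem_append_left _ hmem1
  obtain ⟨h3, ⟨s3, hs3⟩, he3⟩ := pvBfsStepA_inv land V₀ L₀ num s hfr m k st2 h2 nr nc hmem2
    (1, 0) (Or.inr (Or.inr (Or.inl rfl)))
  have hmem3 : (nr, nc) ∈ st3.2.2.2 := by rw [hs3]; exact List.mem_append_left _ hmem2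
  obtain ⟨h4, ⟨s4, hs4⟩, he4⟩ := pvBfsStepA_inv land V₀ L₀ num s hfr m k st3 h3 nr nc hmem3
    (-1, 0) (Or.inr (Or.inr (Or.inr rfl)))
  refine ⟨h4, ⟨s1 ++ s2 ++ s3 ++ s4, by rw [hs4, hs3, hs2, hs1]; simp⟩, ?_⟩
  intro q' hadj
  have hshape := hadj.2.2.2.2
  rcases hshape with ⟨he, hor⟩ | ⟨he, hor⟩
  · rcases hor with h | h
    · have hq' : q' = (nr + (0 : Int), nc + (1 : Int)) :=
        Prod.ext_iff.mpr ⟨by omega, by omega⟩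
      rw [hs4, hs3, hs2]
      refine List.mem_append_left _ (List.mem_append_left _ (List.mem_append_left _ ?_))
      exact hq' ▸ he1 (by rw [← hq']; exact hadj)
    · have hq' : q' = (nr + (0 : Int), nc + (-1 : Int)) :=
        Prod.ext_iff.mpr ⟨by omega, by omega⟩
      rw [hs4, hs3]
      refine List.mem_append_left _ (List.mem_append_left _ ?_)
      exact hq' ▸ he2 (by rw [← hq']; exact hadj)
  · rcases hor with h | h
    · have hq' : q' = (nr + (1 : Int), nc + (0 : Int)) :=
        Prod.ext_iff.mpr ⟨by omega, by omega⟩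
      rw [hs4]
      refine List.mem_append_left _ ?_
      exact hq' ▸ he3 (by rw [← hq']; exact hadj)
    · have hq' : q' = (nr + (-1 : Int), nc + (0 : Int)) :=
        Prod.ext_iff.mpr ⟨by omega, by omega⟩
      exact hq' ▸ he4 (by rw [← hq']; exact hadj)

theorem pvBfsLoopA_spec (land V₀ L₀ : List (List Int)) (num : Int) (s : Int × Int)
    (hfr : pvFresh land V₀ L₀ s) :
    ∀ (fuel : Nat) (m : Nat)
      (st : List (List Int) × List (List Int) × List (Int × Int) × List (Int × Int)),
      pvBInv land V₀ L₀ num s m m st →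
      land.length * pvColsN land + 1 ≤ fuel + m →
      pvBInv land V₀ L₀ num s
        (pvBfsLoopA (land.length : Int) ((pvColsN land : Nat) : Int) num fuel st).2.2.2.length
        (pvBfsLoopA (land.length : Int) ((pvColsN land : Nat) : Int) num fuel st).2.2.2.length
        (pvBfsLoopA (land.length : Int) ((pvColsN land : Nat) : Int) num fuel st) := by
  intro fuel
  induction fuel with
  | zero =>
    intro m st hinv hf
    exfalso
    have hlen := pvNodup_inB_len land st.2.2.2 hinv.2.2.2.1
      (fun p hp => (hinv.2.2.2.2.2.1 p hp).1)
    have hm := hinv.2.2.1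
    omega
  | succ fuel ih =>
    intro m st hinv hf
    obtain ⟨V, L, q, vl⟩ := st
    rcases hqe : q with _ | ⟨⟨nr, nc⟩, q'⟩
    · subst hqe
      have hq := hinv.1
      dsimp only at hq
      have hmlen : vl.length ≤ m := by
        by_contra hlt
        have := congrArg List.length hq
        rw [List.length_drop] at this
        simp at this
        omega
      have hm : m = vl.length := le_antisymm hinv.2.2.1 hmlen
      show pvBInv land V₀ L₀ num s _ _ (V, L, ([] : List (Int × Int)), vl)
      simp only [pvBfsLoopA]
      exact hm ▸ hinv
    · subst hqe
      have hq1 := hinv.1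
      dsimp only at hq1
      have hmlt : m < vl.length := by
        by_contra hge
        rw [List.drop_eq_nil_of_le (by omega)] at hq1
        cases hq1
      have hdropeq : vl.drop m = vl[m] :: vl.drop (m + 1) := List.drop_eq_getElem_cons hmlt
      have hvm : vl[m] = (nr, nc) := by
        rw [hdropeq] at hq1
        exact ((List.cons.injEq _ _ _ _ ▸ hq1).1).symm
      have hq' : q' = vl.drop (m + 1) := by
        rw [hdropeq] at hq1
        exact (List.cons.injEq _ _ _ _ ▸ hq1).2
      have hmemp : (nr, nc) ∈ vl := by rw [← hvm]; exact List.getElem_mem hmlt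
      obtain ⟨h1, h2, h3, h4, h5, h6, h7, h8, h9, h10⟩ := hinv
      have hinv' : pvBInv land V₀ L₀ num s (m + 1) m (V, L, q', vl) :=
        ⟨hq', by omega, by dsimp only; omega, h4, h5, h6, h7, h8, h9, h10⟩
      obtain ⟨hr, ⟨suf, hsuf⟩, hnb⟩ := pvBfsFoldA_inv land V₀ L₀ num s hfr (m + 1) m
        (V, L, q', vl) hinv' nr nc hmemp
      set r := (List.zip [0, 0, 1, -1] [1, -1, 0, 0]).foldl
        (pvBfsStepA (land.length : Int) ((pvColsN land : Nat) : Int) num nr nc)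
        (V, L, q', vl) with hrdef
      have hup : pvBInv land V₀ L₀ num s (m + 1) (m + 1) r := by
        obtain ⟨g1, g2, g3, g4, g5, g6, g7, g8, g9, g10⟩ := hr
        refine ⟨g1, le_rfl, g3, g4, g5, g6, g7, g8, g9, ?_⟩
        intro p hp q'' hadj
        rw [hsuf] at hp
        dsimp only at hp
        rw [List.take_append_of_le_length (by omega), List.take_succ] at hp
        rcases List.mem_append.mp hp with h | h
        · refine g10 p ?_ q'' hadj
          rw [hsuf]
          dsimp only
          rw [List.take_append_of_le_length (by omega)]
          exact h
        · have hpm : p = vl[m] := by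
            rw [List.getElem?_eq_getElem hmlt] at h
            simpa using h
          subst hpm
          rw [hvm] at hadj
          exact hnb q'' hadj
      have hred : pvBfsLoopA (land.length : Int) ((pvColsN land : Nat) : Int) num
          (fuel + 1) (V, L, (nr, nc) :: q', vl)
          = pvBfsLoopA (land.length : Int) ((pvColsN land : Nat) : Int) num fuel r := by
        simp only [pvBfsLoopA, hrdef]
      rw [hred]
      exact ih (m + 1) r hup (by omega)

-- A's size-writeback pass, pointwise (from the bfs helper's final loop)
theorem pvWriteback (land : List (List Int)) (w : Int) :
    ∀ (vl : List (Int × Int)) (g : List (List Int)), pvSh land g →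
      (∀ p ∈ vl, pvInB land p) →
      pvSh land (vl.foldl (fun g p => pvGSet g p.1 p.2 w) g) ∧
      ∀ p : Int × Int, pvInB land p →
        pvGGet (vl.foldl (fun g p => pvGSet g p.1 p.2 w) g) p.1 p.2 =
          if p ∈ vl then w else pvGGet g p.1 p.2 := by
  intro vl
  induction vl with
  | nil =>
    intro g hSh hB
    exact ⟨hSh, fun p hp => by simp⟩
  | cons x xs ih =>
    intro g hSh hB
    have hx : pvInB land x := hB x List.mem_cons_self
    have hSh' := pvSh_gset land g x.1 x.2 w hSh hx.1 hx.2.2.1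
    have hB' : ∀ p ∈ xs, pvInB land p := fun p hp => hB p (List.mem_cons_of_mem _ hp)
    obtain ⟨ih1, ih2⟩ := ih (pvGSet g x.1 x.2 w) hSh' hB'
    simp only [List.foldl_cons]
    refine ⟨ih1, ?_⟩
    intro p hp
    rw [ih2 p hp, pvGGet_gset land g x p w hSh hx hp]
    by_cases h1 : p ∈ xs
    · rw [if_pos h1, if_pos (List.mem_cons_of_mem _ h1)]
    · rw [if_neg h1]
      by_cases h2 : p = x
      · rw [if_pos h2, if_pos (by rw [h2]; exact List.mem_cons_self)]
      · rw [if_neg h2, if_neg (by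
          intro h
          rcases List.mem_cons.mp h with h | h
          · exact h2 h
          · exact h1 h)]

theorem pvBfsA_spec (land V₀ L₀ : List (List Int)) (num : Int) (s : Int × Int)
    (hfr : pvFresh land V₀ L₀ s) (hsB : pvInB land s) (hnzs : pvNz land s)
    (hShV : pvSh land V₀) (hShL : pvSh land L₀) :
    ∃ vl : List (Int × Int), vl.Nodup ∧ (∀ p ∈ vl, pvInB land p) ∧
      (∀ p, pvInB land p → (p ∈ vl ↔ pvConn land s p)) ∧
      pvSh land (pvBfsA (land.length * pvColsN land + 1) (land.length : Int)
        ((pvColsN land : Nat) : Int) num V₀ L₀ s.1 s.2).1 ∧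
      pvSh land (pvBfsA (land.length * pvColsN land + 1) (land.length : Int)
        ((pvColsN land : Nat) : Int) num V₀ L₀ s.1 s.2).2 ∧
      ∀ p, pvInB land p →
        (p ∈ vl →
          pvGGet (pvBfsA (land.length * pvColsN land + 1) (land.length : Int)
            ((pvColsN land : Nat) : Int) num V₀ L₀ s.1 s.2).1 p.1 p.2 = (vl.length : Int) ∧
          pvGGet (pvBfsA (land.length * pvColsN land + 1) (land.length : Int)
            ((pvColsN land : Nat) : Int) num V₀ L₀ s.1 s.2).2 p.1 p.2 = num) ∧
        (p ∉ vl →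
          pvGGet (pvBfsA (land.length * pvColsN land + 1) (land.length : Int)
            ((pvColsN land : Nat) : Int) num V₀ L₀ s.1 s.2).1 p.1 p.2
            = pvGGet V₀ p.1 p.2 ∧
          pvGGet (pvBfsA (land.length * pvColsN land + 1) (land.length : Int)
            ((pvColsN land : Nat) : Int) num V₀ L₀ s.1 s.2).2 p.1 p.2
            = pvGGet L₀ p.1 p.2) := by
  have hinv0 : pvBInv land V₀ L₀ num s 0 0
      (pvGSet V₀ s.1 s.2 1, pvGSet L₀ s.1 s.2 num, [s], [s]) := by
    refine ⟨rfl, le_rfl, by simp, List.nodup_singleton _, List.mem_singleton_self _, ?_,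
      pvSh_gset land V₀ s.1 s.2 1 hShV hsB.1 hsB.2.2.1,
      pvSh_gset land L₀ s.1 s.2 num hShL hsB.1 hsB.2.2.1, ?_, by simp⟩
    · intro p hp
      rw [List.mem_singleton.mp hp]
      exact ⟨hsB, hnzs, Relation.ReflTransGen.refl⟩
    · intro p hp
      have hV := pvGGet_gset land V₀ s p 1 hShV hsB hp
      have hL := pvGGet_gset land L₀ s p num hShL hsB hp
      constructor
      · intro hpin
        have he := List.mem_singleton.mp hpin
        rw [hV, hL, if_pos he, if_pos he]
        exact ⟨rfl, rfl⟩
      · intro hpout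
        have hne : p ≠ s := fun he => hpout (by simp [he])
        rw [hV, hL, if_neg hne, if_neg hne]
        exact ⟨rfl, rfl⟩
  have hloop := pvBfsLoopA_spec land V₀ L₀ num s hfr
    (land.length * pvColsN land + 1) 0
    (pvGSet V₀ s.1 s.2 1, pvGSet L₀ s.1 s.2 num, [s], [s]) hinv0 (by omega)
  set st := pvBfsLoopA (land.length : Int) ((pvColsN land : Nat) : Int) num
    (land.length * pvColsN land + 1)
    (pvGSet V₀ s.1 s.2 1, pvGSet L₀ s.1 s.2 num, [s], [s]) with hstdef
  obtain ⟨g1, g2, g3, g4, g5, g6, g7, g8, g9, g10⟩ := hloop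
  refine ⟨st.2.2.2, g4, fun p hp => (g6 p hp).1, ?_, ?_, ?_, ?_⟩
  · intro p hp
    constructor
    · intro hin
      exact (g6 p hin).2.2
    · intro hconn
      clear hp
      induction hconn with
      | refl => exact g5
      | @tail b c hc hadj ih =>
        exact g10 b (by rw [List.take_length]; exact ih) c hadj
  · unfold pvBfsA
    exact (pvWriteback land (st.2.2.2.length : Int) st.2.2.2 st.1 g7
      (fun p hp => (g6 p hp).1)).1
  · exact g8
  · intro p hp
    have hwb := (pvWriteback land (st.2.2.2.length : Int) st.2.2.2 st.1 g7
      (fun p hp => (g6 p hp).1)).2 p hp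
    constructor
    · intro hin
      constructor
      · show pvGGet (st.2.2.2.foldl (fun g p => pvGSet g p.1 p.2 (st.2.2.2.length : Int))
          st.1) p.1 p.2 = (st.2.2.2.length : Int)
        rw [hwb, if_pos hin]
      · exact ((g9 p hp).1 hin).2
    · intro hout
      constructor
      · show pvGGet (st.2.2.2.foldl (fun g p => pvGSet g p.1 p.2 (st.2.2.2.length : Int))
          st.1) p.1 p.2 = pvGGet V₀ p.1 p.2
        rw [hwb, if_neg hout]
        exact ((g9 p hp).2 hout).1
      · exact ((g9 p hp).2 hout).2


-- ---------- structured views of the two ports ----------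

def pvACell (land : List (List Int)) (st : List (List Int) × List (List Int) × Int)
    (i j : Int) : List (List Int) × List (List Int) × Int :=
  if pvGGet st.2.1 i j = 1 ∧ pvGGet st.1 i j = 0 then
    let r := pvBfsA (land.length * pvColsN land + 1) (land.length : Int)
      ((pvColsN land : Nat) : Int) st.2.2 st.1 st.2.1 i j
    (r.1, r.2, st.2.2 + 1)
  else st

def pvAPhase1 (land : List (List Int)) : List (List Int) × List (List Int) × Int :=
  (PySem.List.pyRange 0 (land.length : Int) 1).foldl (fun st i =>
    (PySem.List.pyRange 0 ((pvColsN land : Nat) : Int) 1).foldl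
      (fun st j => pvACell land st i j) st)
    ((List.replicate land.length (List.replicate (pvColsN land) (0 : Int)), land, 2))

def pvAPhase2 (land V L : List (List Int)) : Int :=
  (PySem.List.max?
    ((PySem.List.pyRange 0 ((pvColsN land : Nat) : Int) 1).foldl (fun ans i =>
      ans ++ [((PySem.List.pyRange 0 (land.length : Int) 1).foldl (fun td j =>
          if 2 ≤ pvGGet L j i ∧ ¬ pvGGet L j i ∈ td.2 then
            (td.1 + pvGGet V j i, td.2 ++ [pvGGet L j i])
          else td) ((0 : Int), ([] : List Int))).1]) ([] : List Int))
    (fun x => x)).getD 0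

theorem pvSolutionA_eq (land : List (List Int)) :
    solution land = pvAPhase2 land (pvAPhase1 land).1 (pvAPhase1 land).2.1 := rfl

def pvLabB (land : List (List Int)) (par : List Int) : PySem.Dict Int Int :=
  (PySem.List.pyRange 0 (land.length : Int) 1).foldl (fun lab i =>
    (PySem.List.pyRange 0 ((pvColsN land : Nat) : Int) 1).foldl (fun lab j =>
      if pvGGet land i j = 1 then
        let r := pvFindF par (i * ((pvColsN land : Nat) : Int) + j)
        if ¬ lab.contains r then lab.insert r (2 + (lab.size : Int)) else lab
      else lab) lab) (PySem.Dict.empty : PySem.Dict Int Int)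

def pvSizeB (land : List (List Int)) (par : List Int) (label : PySem.Dict Int Int) :
    PySem.Dict Int Int :=
  (PySem.List.pyRange 0 (land.length : Int) 1).foldl (fun sz i =>
    (PySem.List.pyRange 0 ((pvColsN land : Nat) : Int) 1).foldl (fun sz j =>
      if pvGGet land i j ≠ 0 then
        let r := pvFindF par (i * ((pvColsN land : Nat) : Int) + j)
        if label.contains r then
          sz.insert (label.getD r 0) (sz.getD (label.getD r 0) 0 + 1)
        else sz
      else sz) sz) (PySem.Dict.empty : PySem.Dict Int Int)

def pvAlB (land : List (List Int)) (par : List Int) (label size : PySem.Dict Int Int) :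
    List (List Int) × List (List Int) :=
  (PySem.List.pyRange 0 (land.length : Int) 1).foldl (fun al i =>
    (PySem.List.pyRange 0 ((pvColsN land : Nat) : Int) 1).foldl (fun al j =>
      if pvGGet al.2 i j ≠ 0 then
        let r := pvFindF par (i * ((pvColsN land : Nat) : Int) + j)
        if label.contains r then
          (pvGSet al.1 i j (size.getD (label.getD r 0) 0),
           pvGSet al.2 i j (label.getD r 0))
        else al
      else al) al)
    ((List.replicate land.length (List.replicate (pvColsN land) (0 : Int)), land))

def pvBestB (land : List (List Int)) (A Lm : List (List Int)) : Int :=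
  (PySem.List.pyRange 0 ((pvColsN land : Nat) : Int) 1).foldl (fun best j =>
    max best ((PySem.List.pyRange 0 (land.length : Int) 1).foldl (fun ts i =>
      let v := pvGGet Lm i j
      if 2 ≤ v ∧ ¬ PySem.Set.contains ts.2 v then
        (ts.1 + pvGGet A i j, PySem.Set.add ts.2 v)
      else ts) ((0 : Int), (PySem.Set.empty : PySem.Set Int))).1)
    (0 : Int)

theorem pvSolutionB_eq (land : List (List Int)) :
    solution_alt land =
      pvBestB land
        (pvAlB land (pvParB land) (pvLabB land (pvParB land))
          (pvSizeB land (pvParB land) (pvLabB land (pvParB land)))).1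
        (pvAlB land (pvParB land) (pvLabB land (pvParB land))
          (pvSizeB land (pvParB land) (pvLabB land (pvParB land)))).2 := rfl

-- ---------- the row-major cell list and component counts ----------

def pvCellsL (land : List (List Int)) : List (Int × Int) :=
  (PySem.List.pyRange 0 (land.length : Int) 1).flatMap (fun i =>
    (PySem.List.pyRange 0 ((pvColsN land : Nat) : Int) 1).map (fun j => (i, j)))

theorem pvMem_cellsL (land : List (List Int)) (p : Int × Int) :
    p ∈ pvCellsL land ↔ pvInB land p := by
  unfold pvCellsL pvInB
  rw [List.mem_flatMap]
  constructor
  · rintro ⟨i, hi, hp⟩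
    obtain ⟨j, hj, rfl⟩ := List.mem_map.mp hp
    have hi' := PySem.List.mem_pyRange_one.mp hi
    have hj' := PySem.List.mem_pyRange_one.mp hj
    exact ⟨hi'.1, hi'.2, hj'.1, hj'.2⟩
  · rintro ⟨h1, h2, h3, h4⟩
    exact ⟨p.1, PySem.List.mem_pyRange_one.mpr ⟨h1, h2⟩,
      List.mem_map.mpr ⟨p.2, PySem.List.mem_pyRange_one.mpr ⟨h3, h4⟩, rfl⟩⟩

theorem pvNodup_cellsL (land : List (List Int)) : (pvCellsL land).Nodup := by
  unfold pvCellsL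
  rw [List.nodup_flatMap]
  constructor
  · intro i _
    refine List.Nodup.map ?_ (PySem.List.nodup_pyRange_one _ _)
    intro a b h
    exact (Prod.ext_iff.mp h).2
  · refine List.Pairwise.imp ?_ (PySem.List.pairwise_lt_pyRange_one 0 (land.length : Int))
    intro a b hab
    intro x hxa hxb
    obtain ⟨j1, _, rfl⟩ := List.mem_map.mp hxa
    obtain ⟨j2, _, he⟩ := List.mem_map.mp hxb
    have := (Prod.ext_iff.mp he).1
    dsimp at this
    omega

def pvRt (land : List (List Int)) (p : Int × Int) : Int :=
  pvFindF (pvParB land) (pvEncI land p)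

def pvCnt (land : List (List Int)) (r : Int) : Int :=
  (((pvCellsL land).filter (fun q =>
    decide (pvGGet land q.1 q.2 ≠ 0) && decide (pvRt land q = r))).length : Int)


-- ---------- coupling A's labelling scan with B's label pass ----------

theorem pvCnt_nonneg (land : List (List Int)) (r : Int) : 0 ≤ pvCnt land r :=
  Int.natCast_nonneg _

theorem pvCnt_pos (land : List (List Int)) (p : Int × Int) (hp : pvInB land p)
    (hnz : pvGGet land p.1 p.2 ≠ 0) : 1 ≤ pvCnt land (pvRt land p) := by
  unfold pvCnt
  have hmem : p ∈ (pvCellsL land).filter (fun q =>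
      decide (pvGGet land q.1 q.2 ≠ 0) && decide (pvRt land q = pvRt land p)) := by
    rw [List.mem_filter]
    refine ⟨(pvMem_cellsL land p).mpr hp, ?_⟩
    simp [hnz]
  have := List.length_pos_of_mem hmem
  omega

def pvOInv (land : List (List Int)) (st : List (List Int) × List (List Int) × Int)
    (lab : PySem.Dict Int Int) : Prop :=
  pvSh land st.1 ∧ pvSh land st.2.1 ∧ st.2.2 = 2 + (lab.size : Int) ∧
  (∀ r v, lab.get? r = some v → 2 ≤ v ∧ v < st.2.2) ∧
  (∀ r1 r2 v, lab.get? r1 = some v → lab.get? r2 = some v → r1 = r2) ∧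
  (∀ p, pvInB land p →
    (pvGGet land p.1 p.2 ≠ 0 ∧ lab.contains (pvRt land p) = true →
      pvGGet st.1 p.1 p.2 = pvCnt land (pvRt land p) ∧
      pvGGet st.2.1 p.1 p.2 = lab.getD (pvRt land p) 0) ∧
    (¬(pvGGet land p.1 p.2 ≠ 0 ∧ lab.contains (pvRt land p) = true) →
      pvGGet st.1 p.1 p.2 = 0 ∧ pvGGet st.2.1 p.1 p.2 = pvGGet land p.1 p.2))

theorem pvOInv_cell (land : List (List Int)) (i j : Int) (hij : pvInB land (i, j))
    (st : List (List Int) × List (List Int) × Int) (lab : PySem.Dict Int Int)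
    (hinv : pvOInv land st lab) :
    pvOInv land (pvACell land st i j)
      (if pvGGet land i j = 1 then
        if ¬ lab.contains (pvFindF (pvParB land) (i * ((pvColsN land : Nat) : Int) + j)) then
          lab.insert (pvFindF (pvParB land) (i * ((pvColsN land : Nat) : Int) + j))
            (2 + (lab.size : Int))
        else lab
      else lab) := by
  obtain ⟨hShV, hShL, hnum, hbnd, hinj, hpt⟩ := hinv
  have hrt : pvFindF (pvParB land) (i * ((pvColsN land : Nat) : Int) + j)
      = pvRt land (i, j) := rfl
  have hmain := hpt (i, j) hij
  have hiff := (pvParB_spec land).2.2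
  by_cases hbr : pvGGet land i j ≠ 0 ∧ lab.contains (pvRt land (i, j)) = true
  · -- already-labelled component (or labelled root): neither side does anything
    have hV := (hmain.1 hbr).1
    have hcpos := pvCnt_pos land (i, j) hij hbr.1
    have hAtrig : ¬ (pvGGet st.2.1 i j = 1 ∧ pvGGet st.1 i j = 0) := by
      rintro ⟨_, hV0⟩
      rw [hV] at hV0
      omega
    have hstep : pvACell land st i j = st := by
      unfold pvACell
      rw [if_neg hAtrig]
    rw [hstep]
    by_cases h1 : pvGGet land i j = 1
    · rw [if_pos h1, if_neg (by rw [hrt]; simp [hbr.2])]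
      exact ⟨hShV, hShL, hnum, hbnd, hinj, hpt⟩
    · rw [if_neg h1]
      exact ⟨hShV, hShL, hnum, hbnd, hinj, hpt⟩
  · have hVL := hmain.2 hbr
    by_cases h1 : pvGGet land i j = 1
    · -- a fresh seed: A floods it, B labels its root
      have hnz : pvGGet land i j ≠ 0 := by omega
      have hnc : lab.contains (pvRt land (i, j)) = false := by
        rcases Bool.eq_false_or_eq_true (lab.contains (pvRt land (i, j))) with h | h
        · exact absurd ⟨hnz, h⟩ hbr
        · exact h
      have hAtrig : pvGGet st.2.1 i j = 1 ∧ pvGGet st.1 i j = 0 := by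
        constructor
        · rw [hVL.2]; exact h1
        · exact hVL.1
      have hnzP : pvNz land (i, j) := hnz
      -- freshness of the component of (i, j)
      have hfr : pvFresh land st.1 st.2.1 (i, j) := by
        refine ⟨?_, ?_, ?_⟩
        · intro q hq hconn
          have hrq : pvRt land q = pvRt land (i, j) := by
            have := (hiff (i, j) q hij hq).mpr hconn
            unfold pvRt
            rw [← this]
          by_cases hq1 : pvGGet land q.1 q.2 ≠ 0 ∧ lab.contains (pvRt land q) = true
          · rw [hrq, hnc] at hq1
            cases hq1.2
          · exact ((hpt q hq).2 hq1).1
        · intro q hq hV0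
          by_cases hq1 : pvGGet land q.1 q.2 ≠ 0 ∧ lab.contains (pvRt land q) = true
          · exfalso
            have := ((hpt q hq).1 hq1).1
            have := pvCnt_pos land q hq hq1.1
            omega
          · exact ((hpt q hq).2 hq1).2
        · intro q hq
          by_cases hq1 : pvGGet land q.1 q.2 ≠ 0 ∧ lab.contains (pvRt land q) = true
          · rw [((hpt q hq).1 hq1).1]
            exact pvCnt_nonneg land _
          · rw [((hpt q hq).2 hq1).1]
      obtain ⟨vl, hnd, hvlB, hvlconn, hShV', hShL', hgrid⟩ :=
        pvBfsA_spec land st.1 st.2.1 st.2.2 (i, j) hfr hij hnzP hShV hShL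
      have hstep : pvACell land st i j =
          (( pvBfsA (land.length * pvColsN land + 1) (land.length : Int)
              ((pvColsN land : Nat) : Int) st.2.2 st.1 st.2.1 i j).1,
           ( pvBfsA (land.length * pvColsN land + 1) (land.length : Int)
              ((pvColsN land : Nat) : Int) st.2.2 st.1 st.2.1 i j).2, st.2.2 + 1) := by
        unfold pvACell
        rw [if_pos hAtrig]
      rw [hstep, if_pos h1, if_pos (by rw [hrt]; simp [hnc])]
      rw [hrt]
      -- the flooded list is exactly the component of (i, j); its length is the count
      have hlen : (vl.length : Int) = pvCnt land (pvRt land (i, j)) := by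
        unfold pvCnt
        congr 1
        apply List.Perm.length_eq
        rw [List.perm_ext_iff_of_nodup hnd (List.Nodup.filter _ (pvNodup_cellsL land))]
        intro q
        rw [List.mem_filter, pvMem_cellsL land q]
        constructor
        · intro hq
          have hqB := hvlB q hq
          have hconn := (hvlconn q hqB).mp hq
          have hqnz := (pvConn_props land ⟨hij, hnzP⟩ hconn).2
          have hrq : pvRt land q = pvRt land (i, j) := by
            have := (hiff (i, j) q hij hqB).mpr hconn
            unfold pvRt
            rw [← this]
          refine ⟨hqB, ?_⟩
          unfold pvNz at hqnz
          simp [hqnz, hrq]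
        · rintro ⟨hqB, hcond⟩
          simp only [Bool.and_eq_true, decide_eq_true_eq] at hcond
          have hconn : pvConn land (i, j) q := by
            apply (hiff (i, j) q hij hqB).mp
            unfold pvRt at hcond
            rw [hcond.2]
          exact (hvlconn q hqB).mpr hconn
      refine ⟨hShV', hShL', ?_, ?_, ?_, ?_⟩
      · dsimp only
        rw [hnum, PySem.Dict.size_insert, hnc]
        push_cast
        ring
      · intro r v hv
        rw [PySem.Dict.get?_insert] at hv
        dsimp only
        split_ifs at hv with hr
        · have hveq := Option.some.inj hv
          omega
        · have := hbnd r v hv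
          omega
      · intro r1 r2 v hv1 hv2
        rw [PySem.Dict.get?_insert] at hv1 hv2
        split_ifs at hv1 hv2 with hr1 hr2 hr2
        · rw [hr1, hr2]
        · exfalso
          have := hbnd r2 v hv2
          have hveq := Option.some.inj hv1
          omega
        · exfalso
          have := hbnd r1 v hv1
          have hveq := Option.some.inj hv2
          omega
        · exact hinj r1 r2 v hv1 hv2
      · intro p hp
        have hg := hgrid p hp
        by_cases hin : p ∈ vl
        · have hconn := (hvlconn p hp).mp hin
          have hpnz := (pvConn_props land ⟨hij, hnzP⟩ hconn).2
          have hrp : pvRt land p = pvRt land (i, j) := by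
            have := (hiff (i, j) p hij hp).mpr hconn
            unfold pvRt
            rw [← this]
          constructor
          · intro _
            dsimp only
            rw [(hg.1 hin).1, (hg.1 hin).2, hrp, hlen,
              PySem.Dict.getD_insert_self, hnum]
            exact ⟨rfl, rfl⟩
          · intro hcon
            exfalso
            apply hcon
            refine ⟨hpnz, ?_⟩
            rw [hrp]
            simp [PySem.Dict.contains_insert]
        · have hnconn : ¬ pvConn land (i, j) p := fun hc => hin ((hvlconn p hp).mpr hc)
          have hrp : pvRt land p ≠ pvRt land (i, j) := by
            intro he
            exact hnconn ((hiff (i, j) p hij hp).mp (by unfold pvRt at he; rw [he]))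
          have hcont' : (lab.insert (pvRt land (i, j)) (2 + (lab.size : Int))).contains
              (pvRt land p) = lab.contains (pvRt land p) := by
            rw [PySem.Dict.contains_eq_isSome_get?, PySem.Dict.contains_eq_isSome_get?,
              PySem.Dict.get?_insert, if_neg hrp]
          have hgetD' : (lab.insert (pvRt land (i, j)) (2 + (lab.size : Int))).getD
              (pvRt land p) 0 = lab.getD (pvRt land p) 0 := by
            rw [PySem.Dict.getD_eq_get?_getD, PySem.Dict.getD_eq_get?_getD,
              PySem.Dict.get?_insert, if_neg hrp]
          constructor
          · intro hcond
            rw [hcont'] at hcond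
            dsimp only
            rw [(hg.2 hin).1, (hg.2 hin).2, hgetD']
            exact (hpt p hp).1 hcond
          · intro hcond
            rw [hcont'] at hcond
            dsimp only
            rw [(hg.2 hin).1, (hg.2 hin).2]
            exact (hpt p hp).2 hcond
    · -- not a seed: nothing happens on either side
      have hAtrig : ¬ (pvGGet st.2.1 i j = 1 ∧ pvGGet st.1 i j = 0) := by
        rintro ⟨hL1, _⟩
        rw [hVL.2] at hL1
        exact h1 hL1
      have hstep : pvACell land st i j = st := by
        unfold pvACell
        rw [if_neg hAtrig]
      rw [hstep, if_neg h1]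
      exact ⟨hShV, hShL, hnum, hbnd, hinj, hpt⟩

theorem pvPhase1_couple (land : List (List Int)) (hpre : Pre_solution land) :
    pvOInv land (pvAPhase1 land) (pvLabB land (pvParB land)) := by
  have hinner : ∀ (i : Int), 0 ≤ i → i < (land.length : Int) →
      ∀ (jl : List Int), (∀ j ∈ jl, 0 ≤ j ∧ j < ((pvColsN land : Nat) : Int)) →
      ∀ st lab, pvOInv land st lab →
      pvOInv land (jl.foldl (fun st j => pvACell land st i j) st)
        (jl.foldl (fun lab j =>
          if pvGGet land i j = 1 then
            if ¬ lab.contains (pvFindF (pvParB land)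
                (i * ((pvColsN land : Nat) : Int) + j)) then
              lab.insert (pvFindF (pvParB land) (i * ((pvColsN land : Nat) : Int) + j))
                (2 + (lab.size : Int))
            else lab
          else lab) lab) := by
    intro i hi0 hi1 jl
    induction jl with
    | nil => intro _ st lab h; exact h
    | cons x xs ih =>
      intro hb st lab h
      simp only [List.foldl_cons]
      exact ih (fun y hy => hb y (List.mem_cons_of_mem _ hy)) _ _
        (pvOInv_cell land i x ⟨hi0, hi1, (hb x List.mem_cons_self).1,
          (hb x List.mem_cons_self).2⟩ st lab h)
  have houter : ∀ (il : List Int), (∀ i ∈ il, 0 ≤ i ∧ i < (land.length : Int)) →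
      ∀ st lab, pvOInv land st lab →
      pvOInv land
        (il.foldl (fun st i => (PySem.List.pyRange 0 ((pvColsN land : Nat) : Int) 1).foldl
          (fun st j => pvACell land st i j) st) st)
        (il.foldl (fun lab i => (PySem.List.pyRange 0 ((pvColsN land : Nat) : Int) 1).foldl
          (fun lab j =>
            if pvGGet land i j = 1 then
              if ¬ lab.contains (pvFindF (pvParB land)
                  (i * ((pvColsN land : Nat) : Int) + j)) then
                lab.insert (pvFindF (pvParB land) (i * ((pvColsN land : Nat) : Int) + j))
                  (2 + (lab.size : Int))
              else lab
            else lab) lab) lab) := by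
    intro il
    induction il with
    | nil => intro _ st lab h; exact h
    | cons x xs ih =>
      intro hb st lab h
      simp only [List.foldl_cons]
      exact ih (fun y hy => hb y (List.mem_cons_of_mem _ hy)) _ _
        (hinner x (hb x List.mem_cons_self).1 (hb x List.mem_cons_self).2 _
          (fun y hy => ⟨(PySem.List.mem_pyRange_one.mp hy).1,
            (PySem.List.mem_pyRange_one.mp hy).2⟩) st lab h)
  have hinit : pvOInv land
      ((List.replicate land.length (List.replicate (pvColsN land) (0 : Int)), land, 2))
      (PySem.Dict.empty : PySem.Dict Int Int) := by
    refine ⟨⟨by simp, ?_⟩, pvSh_land land hpre, by simp [PySem.Dict.size], ?_, ?_, ?_⟩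
    · intro row hrow
      rw [List.eq_of_mem_replicate hrow]
      simp
    · intro r v hv
      rw [PySem.Dict.get?_empty] at hv
      cases hv
    · intro r1 r2 v hv1
      rw [PySem.Dict.get?_empty] at hv1
      cases hv1
    · intro p hp
      constructor
      · rintro ⟨_, hcont⟩
        rw [PySem.Dict.contains_empty] at hcont
        cases hcont
      · intro _
        exact ⟨pvGGet_replicate land p hp, rfl⟩
  exact houter _ (fun y hy => ⟨(PySem.List.mem_pyRange_one.mp hy).1,
    (PySem.List.mem_pyRange_one.mp hy).2⟩) _ _ hinit


-- ---------- B's size and write passes ----------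

theorem pvFoldCells {β : Type} (land : List (List Int)) (f : β → Int → Int → β) (init : β) :
    (PySem.List.pyRange 0 (land.length : Int) 1).foldl (fun acc i =>
      (PySem.List.pyRange 0 ((pvColsN land : Nat) : Int) 1).foldl
        (fun acc j => f acc i j) acc) init
    = (pvCellsL land).foldl (fun acc p => f acc p.1 p.2) init := by
  unfold pvCellsL
  rw [List.foldl_flatMap]
  apply PySem.List.foldl_congr_mem
  intro acc i _
  rw [List.foldl_map]

theorem pvSize_fold (land : List (List Int)) (lab : PySem.Dict Int Int) :
    ∀ (l : List (Int × Int)) (d : PySem.Dict Int Int) (v : Int),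
      (l.foldl (fun sz p =>
        if pvGGet land p.1 p.2 ≠ 0 then
          if lab.contains (pvFindF (pvParB land) (p.1 * ((pvColsN land : Nat) : Int) + p.2)) then
            sz.insert (lab.getD (pvFindF (pvParB land)
                (p.1 * ((pvColsN land : Nat) : Int) + p.2)) 0)
              (sz.getD (lab.getD (pvFindF (pvParB land)
                (p.1 * ((pvColsN land : Nat) : Int) + p.2)) 0) 0 + 1)
          else sz
        else sz) d).getD v 0
      = d.getD v 0 + ((l.filter (fun p =>
          decide (pvGGet land p.1 p.2 ≠ 0) && lab.contains (pvRt land p) &&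
          decide (lab.getD (pvRt land p) 0 = v))).length : Int) := by
  intro l
  induction l with
  | nil => intro d v; simp
  | cons x xs ih =>
    intro d v
    have hrtx : pvFindF (pvParB land) (x.1 * ((pvColsN land : Nat) : Int) + x.2)
        = pvRt land x := rfl
    simp only [List.foldl_cons]
    rw [ih]
    by_cases h1 : pvGGet land x.1 x.2 ≠ 0
    · rw [if_pos h1]
      by_cases h2 : lab.contains (pvFindF (pvParB land)
          (x.1 * ((pvColsN land : Nat) : Int) + x.2)) = true
      · rw [if_pos h2]
        by_cases h3 : lab.getD (pvRt land x) 0 = v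
        · rw [List.filter_cons_of_pos (by
            rw [hrtx] at h2
            simp [h1, h2, h3])]
          rw [hrtx, h3, PySem.Dict.getD_insert, if_pos rfl]
          simp only [List.length_cons]
          push_cast
          ring
        · rw [List.filter_cons_of_neg (by
            simp only [Bool.and_eq_true, decide_eq_true_eq]
            rintro ⟨_, h3'⟩
            exact h3 h3')]
          rw [hrtx, PySem.Dict.getD_insert, if_neg (fun he => h3 he.symm)]
      · rw [if_neg h2]
        rw [List.filter_cons_of_neg (by
          simp only [Bool.and_eq_true, decide_eq_true_eq]
          rintro ⟨⟨_, h2'⟩, _⟩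
          rw [hrtx] at h2
          exact h2 h2')]
    · rw [if_neg h1]
      rw [List.filter_cons_of_neg (by
        simp only [Bool.and_eq_true, decide_eq_true_eq]
        rintro ⟨⟨h1', _⟩, _⟩
        exact h1 h1')]


theorem pvSizeB_getD (land : List (List Int)) (lab : PySem.Dict Int Int)
    (hinj : ∀ r1 r2 v, lab.get? r1 = some v → lab.get? r2 = some v → r1 = r2)
    (r v : Int) (hrv : lab.get? r = some v) :
    (pvSizeB land (pvParB land) lab).getD v 0 = pvCnt land r := by
  have hcells : pvSizeB land (pvParB land) lab =
      (pvCellsL land).foldl (fun sz p =>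
        if pvGGet land p.1 p.2 ≠ 0 then
          if lab.contains (pvFindF (pvParB land)
              (p.1 * ((pvColsN land : Nat) : Int) + p.2)) then
            sz.insert (lab.getD (pvFindF (pvParB land)
                (p.1 * ((pvColsN land : Nat) : Int) + p.2)) 0)
              (sz.getD (lab.getD (pvFindF (pvParB land)
                (p.1 * ((pvColsN land : Nat) : Int) + p.2)) 0) 0 + 1)
          else sz
        else sz) PySem.Dict.empty := by
    unfold pvSizeB
    exact pvFoldCells land _ _
  rw [hcells, pvSize_fold land lab (pvCellsL land) PySem.Dict.empty v,
    PySem.Dict.getD_empty, zero_add]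
  unfold pvCnt
  have hfeq : (pvCellsL land).filter (fun p =>
      decide (pvGGet land p.1 p.2 ≠ 0) && lab.contains (pvRt land p) &&
      decide (lab.getD (pvRt land p) 0 = v)) =
    (pvCellsL land).filter (fun q =>
      decide (pvGGet land q.1 q.2 ≠ 0) && decide (pvRt land q = r)) := by
    apply List.filter_congr
    intro q _
    by_cases hq : pvRt land q = r
    · have hcont : lab.contains r = true := by
        rw [PySem.Dict.contains_eq_isSome_get?, hrv]
        rfl
      have hgd : lab.getD r 0 = v := by
        rw [PySem.Dict.getD_eq_get?_getD, hrv]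
        rfl
      simp [hq, hcont, hgd]
    · rcases Bool.eq_false_or_eq_true (lab.contains (pvRt land q)) with hc | hc
      · have hg : lab.getD (pvRt land q) 0 ≠ v := by
          intro hg
          have hcsome : (lab.get? (pvRt land q)).isSome = true := by
            rw [← PySem.Dict.contains_eq_isSome_get?]
            exact hc
          obtain ⟨w, hw⟩ := Option.isSome_iff_exists.mp hcsome
          have hwv : w = v := by
            rw [PySem.Dict.getD_eq_get?_getD, hw] at hg
            exact hg
          exact hq (hinj _ _ v (hwv ▸ hw) hrv)
        simp [hc, hg, hq]
      · simp [hc, hq]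
  rw [hfeq]

theorem pvAl_fold (land : List (List Int)) (lab sz : PySem.Dict Int Int) :
    ∀ (l : List (Int × Int)) (Ag Lg : List (List Int)),
      pvSh land Ag → pvSh land Lg → l.Nodup → (∀ p ∈ l, pvInB land p) →
      (∀ p ∈ l, pvGGet Lg p.1 p.2 = pvGGet land p.1 p.2) →
      pvSh land (l.foldl (fun al (p : Int × Int) =>
        if pvGGet al.2 p.1 p.2 ≠ 0 then
          if lab.contains (pvFindF (pvParB land)
              (p.1 * ((pvColsN land : Nat) : Int) + p.2)) then
            (pvGSet al.1 p.1 p.2 (sz.getD (lab.getD (pvFindF (pvParB land)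
                (p.1 * ((pvColsN land : Nat) : Int) + p.2)) 0) 0),
             pvGSet al.2 p.1 p.2 (lab.getD (pvFindF (pvParB land)
                (p.1 * ((pvColsN land : Nat) : Int) + p.2)) 0))
          else al
        else al) (Ag, Lg)).1 ∧
      pvSh land (l.foldl (fun al (p : Int × Int) =>
        if pvGGet al.2 p.1 p.2 ≠ 0 then
          if lab.contains (pvFindF (pvParB land)
              (p.1 * ((pvColsN land : Nat) : Int) + p.2)) then
            (pvGSet al.1 p.1 p.2 (sz.getD (lab.getD (pvFindF (pvParB land)
                (p.1 * ((pvColsN land : Nat) : Int) + p.2)) 0) 0),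
             pvGSet al.2 p.1 p.2 (lab.getD (pvFindF (pvParB land)
                (p.1 * ((pvColsN land : Nat) : Int) + p.2)) 0))
          else al
        else al) (Ag, Lg)).2 ∧
      (∀ p, pvInB land p →
        (p ∈ l →
          (pvGGet land p.1 p.2 ≠ 0 ∧ lab.contains (pvRt land p) = true →
            pvGGet (l.foldl (fun al (p : Int × Int) =>
              if pvGGet al.2 p.1 p.2 ≠ 0 then
                if lab.contains (pvFindF (pvParB land)
                    (p.1 * ((pvColsN land : Nat) : Int) + p.2)) then
                  (pvGSet al.1 p.1 p.2 (sz.getD (lab.getD (pvFindF (pvParB land)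
                      (p.1 * ((pvColsN land : Nat) : Int) + p.2)) 0) 0),
                   pvGSet al.2 p.1 p.2 (lab.getD (pvFindF (pvParB land)
                      (p.1 * ((pvColsN land : Nat) : Int) + p.2)) 0))
                else al
              else al) (Ag, Lg)).1 p.1 p.2
              = sz.getD (lab.getD (pvRt land p) 0) 0 ∧
            pvGGet (l.foldl (fun al (p : Int × Int) =>
              if pvGGet al.2 p.1 p.2 ≠ 0 then
                if lab.contains (pvFindF (pvParB land)
                    (p.1 * ((pvColsN land : Nat) : Int) + p.2)) then
                  (pvGSet al.1 p.1 p.2 (sz.getD (lab.getD (pvFindF (pvParB land)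
                      (p.1 * ((pvColsN land : Nat) : Int) + p.2)) 0) 0),
                   pvGSet al.2 p.1 p.2 (lab.getD (pvFindF (pvParB land)
                      (p.1 * ((pvColsN land : Nat) : Int) + p.2)) 0))
                else al
              else al) (Ag, Lg)).2 p.1 p.2 = lab.getD (pvRt land p) 0) ∧
          (¬(pvGGet land p.1 p.2 ≠ 0 ∧ lab.contains (pvRt land p) = true) →
            pvGGet (l.foldl (fun al (p : Int × Int) =>
              if pvGGet al.2 p.1 p.2 ≠ 0 then
                if lab.contains (pvFindF (pvParB land)
                    (p.1 * ((pvColsN land : Nat) : Int) + p.2)) then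
                  (pvGSet al.1 p.1 p.2 (sz.getD (lab.getD (pvFindF (pvParB land)
                      (p.1 * ((pvColsN land : Nat) : Int) + p.2)) 0) 0),
                   pvGSet al.2 p.1 p.2 (lab.getD (pvFindF (pvParB land)
                      (p.1 * ((pvColsN land : Nat) : Int) + p.2)) 0))
                else al
              else al) (Ag, Lg)).1 p.1 p.2 = pvGGet Ag p.1 p.2 ∧
            pvGGet (l.foldl (fun al (p : Int × Int) =>
              if pvGGet al.2 p.1 p.2 ≠ 0 then
                if lab.contains (pvFindF (pvParB land)
                    (p.1 * ((pvColsN land : Nat) : Int) + p.2)) then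
                  (pvGSet al.1 p.1 p.2 (sz.getD (lab.getD (pvFindF (pvParB land)
                      (p.1 * ((pvColsN land : Nat) : Int) + p.2)) 0) 0),
                   pvGSet al.2 p.1 p.2 (lab.getD (pvFindF (pvParB land)
                      (p.1 * ((pvColsN land : Nat) : Int) + p.2)) 0))
                else al
              else al) (Ag, Lg)).2 p.1 p.2 = pvGGet Lg p.1 p.2)) ∧
        (p ∉ l →
          pvGGet (l.foldl (fun al (p : Int × Int) =>
            if pvGGet al.2 p.1 p.2 ≠ 0 then
              if lab.contains (pvFindF (pvParB land)
                  (p.1 * ((pvColsN land : Nat) : Int) + p.2)) then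
                (pvGSet al.1 p.1 p.2 (sz.getD (lab.getD (pvFindF (pvParB land)
                    (p.1 * ((pvColsN land : Nat) : Int) + p.2)) 0) 0),
                 pvGSet al.2 p.1 p.2 (lab.getD (pvFindF (pvParB land)
                    (p.1 * ((pvColsN land : Nat) : Int) + p.2)) 0))
              else al
            else al) (Ag, Lg)).1 p.1 p.2 = pvGGet Ag p.1 p.2 ∧
          pvGGet (l.foldl (fun al (p : Int × Int) =>
            if pvGGet al.2 p.1 p.2 ≠ 0 then
              if lab.contains (pvFindF (pvParB land)
                  (p.1 * ((pvColsN land : Nat) : Int) + p.2)) then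
                (pvGSet al.1 p.1 p.2 (sz.getD (lab.getD (pvFindF (pvParB land)
                    (p.1 * ((pvColsN land : Nat) : Int) + p.2)) 0) 0),
                 pvGSet al.2 p.1 p.2 (lab.getD (pvFindF (pvParB land)
                    (p.1 * ((pvColsN land : Nat) : Int) + p.2)) 0))
              else al
            else al) (Ag, Lg)).2 p.1 p.2 = pvGGet Lg p.1 p.2)) := by
  intro l
  induction l with
  | nil =>
    intro Ag Lg hShA hShL _ _ _
    refine ⟨hShA, hShL, ?_⟩
    intro p hp
    exact ⟨fun h => absurd h List.not_mem_nil, fun _ => ⟨rfl, rfl⟩⟩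
  | cons x xs ih =>
    intro Ag Lg hShA hShL hnd hB hLland
    have hxB := hB x List.mem_cons_self
    have hLx := hLland x List.mem_cons_self
    have hrtx : pvFindF (pvParB land) (x.1 * ((pvColsN land : Nat) : Int) + x.2)
        = pvRt land x := rfl
    simp only [List.foldl_cons]
    by_cases hcond : pvGGet land x.1 x.2 ≠ 0 ∧ lab.contains (pvRt land x) = true
    · have hstep : (if pvGGet (Ag, Lg).2 x.1 x.2 ≠ 0 then
          if lab.contains (pvFindF (pvParB land)
              (x.1 * ((pvColsN land : Nat) : Int) + x.2)) then
            (pvGSet (Ag, Lg).1 x.1 x.2 (sz.getD (lab.getD (pvFindF (pvParB land)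
                (x.1 * ((pvColsN land : Nat) : Int) + x.2)) 0) 0),
             pvGSet (Ag, Lg).2 x.1 x.2 (lab.getD (pvFindF (pvParB land)
                (x.1 * ((pvColsN land : Nat) : Int) + x.2)) 0))
          else (Ag, Lg)
        else (Ag, Lg)) =
          (pvGSet Ag x.1 x.2 (sz.getD (lab.getD (pvRt land x) 0) 0),
           pvGSet Lg x.1 x.2 (lab.getD (pvRt land x) 0)) := by
        rw [hrtx]
        dsimp only
        rw [if_pos (by rw [hLx]; exact hcond.1), if_pos hcond.2]
      rw [hstep]
      have hShA' := pvSh_gset land Ag x.1 x.2 (sz.getD (lab.getD (pvRt land x) 0) 0)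
        hShA hxB.1 hxB.2.2.1
      have hShL' := pvSh_gset land Lg x.1 x.2 (lab.getD (pvRt land x) 0) hShL hxB.1 hxB.2.2.1
      have hLland' : ∀ p ∈ xs, pvGGet (pvGSet Lg x.1 x.2 (lab.getD (pvRt land x) 0)) p.1 p.2
          = pvGGet land p.1 p.2 := by
        intro p hp
        have hne : p ≠ x := fun he => (List.nodup_cons.mp hnd).1 (he ▸ hp)
        rw [pvGGet_gset land Lg x p _ hShL hxB (hB p (List.mem_cons_of_mem _ hp)),
          if_neg hne]
        exact hLland p (List.mem_cons_of_mem _ hp)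
      obtain ⟨g1, g2, g3⟩ := ih (pvGSet Ag x.1 x.2 (sz.getD (lab.getD (pvRt land x) 0) 0))
        (pvGSet Lg x.1 x.2 (lab.getD (pvRt land x) 0)) hShA' hShL'
        (List.nodup_cons.mp hnd).2 (fun p hp => hB p (List.mem_cons_of_mem _ hp)) hLland'
      refine ⟨g1, g2, ?_⟩
      intro p hp
      constructor
      · intro hpin
        rcases List.mem_cons.mp hpin with he | hmem
        · subst he
          have hnot : p ∉ xs := (List.nodup_cons.mp hnd).1
          have hout := (g3 p hp).2 hnot
          refine ⟨fun _ => ?_, fun hc => absurd hcond hc⟩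
          rw [hout.1, hout.2,
            pvGGet_gset land Ag p p _ hShA hxB hp, if_pos rfl,
            pvGGet_gset land Lg p p _ hShL hxB hp, if_pos rfl]
          exact ⟨rfl, rfl⟩
        · have hne : p ≠ x := fun he => (List.nodup_cons.mp hnd).1 (he ▸ hmem)
          have hin := (g3 p hp).1 hmem
          refine ⟨hin.1, fun hc => ?_⟩
          have := hin.2 hc
          rw [pvGGet_gset land Ag x p _ hShA hxB hp, if_neg hne,
            pvGGet_gset land Lg x p _ hShL hxB hp, if_neg hne] at this
          exact this
      · intro hpout
        have hne : p ≠ x := fun he => hpout (he ▸ List.mem_cons_self)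
        have hnmem : p ∉ xs := fun h => hpout (List.mem_cons_of_mem _ h)
        have := (g3 p hp).2 hnmem
        rw [pvGGet_gset land Ag x p _ hShA hxB hp, if_neg hne,
          pvGGet_gset land Lg x p _ hShL hxB hp, if_neg hne] at this
        exact this
    · have hstep : (if pvGGet (Ag, Lg).2 x.1 x.2 ≠ 0 then
          if lab.contains (pvFindF (pvParB land)
              (x.1 * ((pvColsN land : Nat) : Int) + x.2)) then
            (pvGSet (Ag, Lg).1 x.1 x.2 (sz.getD (lab.getD (pvFindF (pvParB land)
                (x.1 * ((pvColsN land : Nat) : Int) + x.2)) 0) 0),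
             pvGSet (Ag, Lg).2 x.1 x.2 (lab.getD (pvFindF (pvParB land)
                (x.1 * ((pvColsN land : Nat) : Int) + x.2)) 0))
          else (Ag, Lg)
        else (Ag, Lg)) = (Ag, Lg) := by
        rw [hrtx]
        dsimp only
        by_cases h1 : pvGGet land x.1 x.2 ≠ 0
        · rw [if_pos (by rw [hLx]; exact h1), if_neg (fun hc => hcond ⟨h1, hc⟩)]
        · rw [if_neg (by rw [hLx]; exact h1)]
      rw [hstep]
      obtain ⟨g1, g2, g3⟩ := ih Ag Lg hShA hShL (List.nodup_cons.mp hnd).2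
        (fun p hp => hB p (List.mem_cons_of_mem _ hp))
        (fun p hp => hLland p (List.mem_cons_of_mem _ hp))
      refine ⟨g1, g2, ?_⟩
      intro p hp
      constructor
      · intro hpin
        rcases List.mem_cons.mp hpin with he | hmem
        · subst he
          have hnot : p ∉ xs := (List.nodup_cons.mp hnd).1
          have hout := (g3 p hp).2 hnot
          exact ⟨fun hc => absurd hc hcond, fun _ => hout⟩
        · exact (g3 p hp).1 hmem
      · intro hpout
        exact (g3 p hp).2 (fun h => hpout (List.mem_cons_of_mem _ h))


theorem pvAlB_grid (land : List (List Int)) (hpre : Pre_solution land)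
    (lab sz : PySem.Dict Int Int) :
    pvSh land (pvAlB land (pvParB land) lab sz).1 ∧
    pvSh land (pvAlB land (pvParB land) lab sz).2 ∧
    ∀ p, pvInB land p →
      (pvGGet land p.1 p.2 ≠ 0 ∧ lab.contains (pvRt land p) = true →
        pvGGet (pvAlB land (pvParB land) lab sz).1 p.1 p.2
          = sz.getD (lab.getD (pvRt land p) 0) 0 ∧
        pvGGet (pvAlB land (pvParB land) lab sz).2 p.1 p.2 = lab.getD (pvRt land p) 0) ∧
      (¬(pvGGet land p.1 p.2 ≠ 0 ∧ lab.contains (pvRt land p) = true) →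
        pvGGet (pvAlB land (pvParB land) lab sz).1 p.1 p.2 = 0 ∧
        pvGGet (pvAlB land (pvParB land) lab sz).2 p.1 p.2 = pvGGet land p.1 p.2) := by
  have hcells : pvAlB land (pvParB land) lab sz =
      (pvCellsL land).foldl (fun al (p : Int × Int) =>
        if pvGGet al.2 p.1 p.2 ≠ 0 then
          if lab.contains (pvFindF (pvParB land)
              (p.1 * ((pvColsN land : Nat) : Int) + p.2)) then
            (pvGSet al.1 p.1 p.2 (sz.getD (lab.getD (pvFindF (pvParB land)
                (p.1 * ((pvColsN land : Nat) : Int) + p.2)) 0) 0),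
             pvGSet al.2 p.1 p.2 (lab.getD (pvFindF (pvParB land)
                (p.1 * ((pvColsN land : Nat) : Int) + p.2)) 0))
          else al
        else al)
        ((List.replicate land.length (List.replicate (pvColsN land) (0 : Int)), land)) := by
    unfold pvAlB
    exact pvFoldCells land _ _
  have hShA0 : pvSh land (List.replicate land.length
      (List.replicate (pvColsN land) (0 : Int))) := by
    refine ⟨by simp, ?_⟩
    intro row hrow
    rw [List.eq_of_mem_replicate hrow]
    simp
  obtain ⟨g1, g2, g3⟩ := pvAl_fold land lab sz (pvCellsL land)
    (List.replicate land.length (List.replicate (pvColsN land) (0 : Int))) land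
    hShA0 (pvSh_land land hpre) (pvNodup_cellsL land)
    (fun p hp => (pvMem_cellsL land p).mp hp) (fun p hp => rfl)
  rw [hcells]
  refine ⟨g1, g2, ?_⟩
  intro p hp
  have hmem := (pvMem_cellsL land p).mpr hp
  have hin := (g3 p hp).1 hmem
  refine ⟨hin.1, ?_⟩
  intro hc
  have := hin.2 hc
  rwa [pvGGet_replicate land p hp] at this

theorem pvTempA_nonneg (land V L : List (List Int)) (c : Int)
    (hVnn : ∀ p : Int × Int, pvInB land p → 0 ≤ pvGGet V p.1 p.2)
    (hc0 : 0 ≤ c) (hc1 : c < ((pvColsN land : Nat) : Int)) :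
    ∀ (jl : List Int) (acc : Int × List Int), 0 ≤ acc.1 →
      (∀ j ∈ jl, 0 ≤ j ∧ j < (land.length : Int)) →
      0 ≤ (jl.foldl (fun td j =>
        if 2 ≤ pvGGet L j c ∧ ¬ pvGGet L j c ∈ td.2 then
          (td.1 + pvGGet V j c, td.2 ++ [pvGGet L j c])
        else td) acc).1 := by
  intro jl
  induction jl with
  | nil => intro acc h _; exact h
  | cons x xs ih =>
    intro acc hacc hb
    simp only [List.foldl_cons]
    apply ih _ ?_ (fun y hy => hb y (List.mem_cons_of_mem _ hy))
    split_ifs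
    · dsimp only
      have hvv := hVnn (x, c) ⟨(hb x List.mem_cons_self).1, (hb x List.mem_cons_self).2, hc0, hc1⟩
      dsimp only at hvv
      omega
    · exact hacc

theorem pvFoldMax_le (m : Int) :
    ∀ (l : List Int) (a : Int), a ≤ m → (∀ y ∈ l, y ≤ m) → l.foldl max a ≤ m := by
  intro l
  induction l with
  | nil => intro a h _; exact h
  | cons x xs ih =>
    intro a ha hb
    simp only [List.foldl_cons]
    exact ih (max a x) (max_le ha (hb x List.mem_cons_self))
      (fun y hy => hb y (List.mem_cons_of_mem _ hy))

theorem pvMaxFold (l : List Int) (hnn : ∀ x ∈ l, 0 ≤ x) :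
    (PySem.List.max? l (fun x => x)).getD 0 = l.foldl max 0 := by
  cases hl : l with
  | nil => rfl
  | cons x xs =>
    rcases hm : PySem.List.max? (x :: xs) (fun y => y) with _ | m
    · exact absurd ((PySem.List.max?_eq_none_iff _ _).mp hm) (by simp)
    · have hmem := PySem.List.max?_mem hm
      have hmax := PySem.List.max?_isMax hm
      have h1 : m ≤ (x :: xs).foldl max 0 :=
        (PySem.List.le_foldl_max (x :: xs) 0).2 m hmem
      have h2 : (x :: xs).foldl max 0 ≤ m :=
        pvFoldMax_le m (x :: xs) 0 (hnn m (hl ▸ hmem)) hmax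
      show m = (x :: xs).foldl max 0
      omega

theorem pvPhase2_eq (land V L A Lm : List (List Int))
    (hVL : ∀ p : Int × Int, pvInB land p →
      pvGGet A p.1 p.2 = pvGGet V p.1 p.2 ∧ pvGGet Lm p.1 p.2 = pvGGet L p.1 p.2)
    (hVnn : ∀ p : Int × Int, pvInB land p → 0 ≤ pvGGet V p.1 p.2) :
    pvAPhase2 land V L = pvBestB land A Lm := by
  have hinner : ∀ c : Int, 0 ≤ c → c < ((pvColsN land : Nat) : Int) →
      ((PySem.List.pyRange 0 (land.length : Int) 1).foldl (fun ts i =>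
        let v := pvGGet Lm i c
        if 2 ≤ v ∧ ¬ PySem.Set.contains ts.2 v then
          (ts.1 + pvGGet A i c, PySem.Set.add ts.2 v)
        else ts) ((0 : Int), (PySem.Set.empty : PySem.Set Int)))
      = ((PySem.List.pyRange 0 (land.length : Int) 1).foldl (fun td j =>
          if 2 ≤ pvGGet L j c ∧ ¬ pvGGet L j c ∈ td.2 then
            (td.1 + pvGGet V j c, td.2 ++ [pvGGet L j c])
          else td) ((0 : Int), ([] : List Int))) := by
    intro c hc0 hc1
    apply PySem.List.foldl_congr_mem
    intro acc x hx
    have hx' := PySem.List.mem_pyRange_one.mp hx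
    have hp : pvInB land (x, c) := ⟨hx'.1, hx'.2, hc0, hc1⟩
    have hA := (hVL (x, c) hp).1
    have hL := (hVL (x, c) hp).2
    dsimp only at hA hL
    show (let v := pvGGet Lm x c
      if 2 ≤ v ∧ ¬ PySem.Set.contains acc.2 v then
        (acc.1 + pvGGet A x c, PySem.Set.add acc.2 v)
      else acc) = _
    rw [hA, hL]
    by_cases hcnd : 2 ≤ pvGGet L x c ∧ pvGGet L x c ∉ acc.2
    · rw [if_pos ⟨hcnd.1, fun hcon => hcnd.2 ((PySem.Set.contains_iff _ _).mp hcon)⟩,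
        if_pos hcnd, PySem.Set.add_of_not_mem hcnd.2]
    · rw [if_neg (fun hcon => hcnd ⟨hcon.1,
        fun hm => hcon.2 ((PySem.Set.contains_iff _ _).mpr hm)⟩), if_neg hcnd]
  unfold pvAPhase2 pvBestB
  rw [PySem.List.foldl_append_singleton_eq_map, List.nil_append]
  have hmapeq : (PySem.List.pyRange 0 ((pvColsN land : Nat) : Int) 1).foldl (fun best j =>
      max best ((PySem.List.pyRange 0 (land.length : Int) 1).foldl (fun ts i =>
        let v := pvGGet Lm i j
        if 2 ≤ v ∧ ¬ PySem.Set.contains ts.2 v then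
          (ts.1 + pvGGet A i j, PySem.Set.add ts.2 v)
        else ts) ((0 : Int), (PySem.Set.empty : PySem.Set Int))).1) (0 : Int)
    = ((PySem.List.pyRange 0 ((pvColsN land : Nat) : Int) 1).map (fun i =>
        ((PySem.List.pyRange 0 (land.length : Int) 1).foldl (fun td j =>
          if 2 ≤ pvGGet L j i ∧ ¬ pvGGet L j i ∈ td.2 then
            (td.1 + pvGGet V j i, td.2 ++ [pvGGet L j i])
          else td) ((0 : Int), ([] : List Int))).1)).foldl max 0 := by
    rw [List.foldl_map]
    apply PySem.List.foldl_congr_mem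
    intro acc x hx
    have hx' := PySem.List.mem_pyRange_one.mp hx
    rw [hinner x hx'.1 hx'.2]
  rw [hmapeq, pvMaxFold]
  intro x hx
  obtain ⟨c, hc, rfl⟩ := List.mem_map.mp hx
  have hc' := PySem.List.mem_pyRange_one.mp hc
  exact pvTempA_nonneg land V L c hVnn hc'.1 hc'.2 _ _ le_rfl
    (fun y hy => ⟨(PySem.List.mem_pyRange_one.mp hy).1, (PySem.List.mem_pyRange_one.mp hy).2⟩)

-- ===== VERDICT (by name: the statement is the Claim_ definition above) =====
theorem solution_spec : Claim_equal_solution := by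
  intro land hdom hpre
  unfold Spec_solution
  rw [pvSolutionA_eq, pvSolutionB_eq]
  obtain ⟨hShV, hShL, hnum, hbnd, hinj, hpt⟩ := pvPhase1_couple land hpre
  obtain ⟨hSa, hSl, hgr⟩ := pvAlB_grid land hpre (pvLabB land (pvParB land))
    (pvSizeB land (pvParB land) (pvLabB land (pvParB land)))
  apply pvPhase2_eq
  · intro p hp
    by_cases hc : pvGGet land p.1 p.2 ≠ 0 ∧
        (pvLabB land (pvParB land)).contains (pvRt land p) = true
    · have hB := (hgr p hp).1 hc
      have hA := (hpt p hp).1 hc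
      have hcsome : ((pvLabB land (pvParB land)).get? (pvRt land p)).isSome = true := by
        rw [← PySem.Dict.contains_eq_isSome_get?]
        exact hc.2
      obtain ⟨w, hw⟩ := Option.isSome_iff_exists.mp hcsome
      have hgd : (pvLabB land (pvParB land)).getD (pvRt land p) 0 = w := by
        rw [PySem.Dict.getD_eq_get?_getD, hw]
        rfl
      have hsz := pvSizeB_getD land (pvLabB land (pvParB land)) hinj (pvRt land p) w hw
      constructor
      · rw [hB.1, hA.1, hgd, hsz]
      · rw [hB.2, hA.2]
    · have hB := (hgr p hp).2 hc
      have hA := (hpt p hp).2 hc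
      exact ⟨by rw [hB.1, hA.1], by rw [hB.2, hA.2]⟩
  · intro p hp
    by_cases hc : pvGGet land p.1 p.2 ≠ 0 ∧
        (pvLabB land (pvParB land)).contains (pvRt land p) = true
    · rw [((hpt p hp).1 hc).1]
      exact pvCnt_nonneg land _
    · rw [((hpt p hp).2 hc).1]
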